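-- pv_equiv track=rewrite | github.com/paramoshin/advent-of-code-2020 | day8.py | fix_program
-- ===== SOURCE A (Python) =====
-- from typing import List, Tuple
--
-- def run_code(commands: List[str]) -> Tuple[str, int]:
--     call_count = {}
--     acc = 0
--     i = 0
--     status = ""
--     while True:
--         if i in call_count:
--             status = "error"
--             break
--         elif i >= len(commands):
--             status = "ok"
--             break
--         else:
--             call_count[i] = 1
--         command = commands[i]
--
--         operation, args = command.split(" ")
--         sign = args[0]
--         value = int(args[1:])
--
--         if operation == "nop":
--             i += 1
--         elif operation == "acc":
--             if sign == "-":
--                 acc -= value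
--             elif sign == "+":
--                 acc += value
--             i += 1
--         elif operation == "jmp":
--             if sign == "-":
--                 i -= value
--             elif sign == "+":
--                 i += value
--     return status, acc
--
-- def fix_program(commands: List[str]) -> List[str]:
--     positions = set()
--     for i, command in enumerate(commands):
--         if "nop" in command:
--             original_command = command
--             commands[i] = command.replace("nop", "jmp")
--             status, acc = run_code(commands)
--             if status == "ok":
--                 return status, acc
--             else:
--                 commands[i] = original_command
--         if "jmp" in command:
--             original_command = command
--             commands[i] = command.replace("jmp", "nop")
--             status, acc = run_code(commands)
--             if status == "ok":
--                 return status, acc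
--             else:
--                 commands[i] = original_command
--     return "error", 0
-- ===== SOURCE B (Python) =====
-- # B: run the original program once to record the visit order, then decide each
-- # candidate swap by a flip-free walk of the ORIGINAL successor graph (exit /
-- # first recorded node compared by visit order / fresh cycle); one final run
-- # produces the accumulator. A mutates `commands` in place on success; B never
-- # mutates -- the equivalence is about the return value only.
-- def _parse(c):
--     op, args = c.split(" ")
--     v = int(args[1:])
--     return (op, -v if args[0] == "-" else v)
--
--
-- def _succ(prog, x):
--     op, v = prog[x]
--     return x + v if op == "jmp" else x + 1
--
--
-- def _acc_run(prog, swap):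
--     seen, acc, x = set(), 0, 0
--     while x < len(prog) and x not in seen:
--         seen.add(x)
--         op, v = prog[x]
--         if x == swap:
--             op = "jmp" if op == "nop" else "nop"
--         if op == "acc":
--             acc += v
--             x += 1
--         elif op == "jmp":
--             x += v
--         else:
--             x += 1
--     return acc
--
--
-- def fix_program(commands):
--     if not any(("nop" in c) or ("jmp" in c) for c in commands):
--         return ("error", 0)
--     prog = [_parse(c) for c in commands]
--     n = len(prog)
--     order, acc0, x = {}, 0, 0
--     while x < n and x not in order:
--         order[x] = len(order)
--         op, v = prog[x]
--         if op == "acc":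
--             acc0 += v
--         x = x + v if op == "jmp" else x + 1
--     ok0 = x >= n
--
--     def walk(j):
--         seen = set()
--         while True:
--             if j >= n:
--                 return (True, None)
--             if j in order:
--                 return (ok0, j)
--             if j in seen:
--                 return (False, None)
--             seen.add(j)
--             j = _succ(prog, j)
--
--     for i, (op, v) in enumerate(prog):
--         if op != "nop" and op != "jmp":
--             continue
--         if i not in order:
--             if ok0:
--                 return ("ok", acc0)
--             continue
--         j = i + v if op == "nop" else i + 1
--         reach, merge = walk(j)
--         if reach and (merge is None or order[merge] > order[i]):
--             return ("ok", _acc_run(prog, i))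
--     return ("error", 0)
-- ===== Notes on version B (the rewrite author's own statement) =====
-- stated objective: alternative
-- what changed: B runs the original program once to record each position's visit order, then decides every candidate swap by a flip-free walk of the original successor graph (stop at exit, at the first recorded position compared by visit order, or at a fresh cycle) and performs a single flipped run only for the winner's accumulator, instead of A's full flipped re-simulation -- with per-step string splitting and int parsing -- for every candidate.
-- outside the precondition, e.g. on fix_program(['nop +0', 'x']): A returns ('error', 0), B raises ValueError; on fix_program(['jmp -1']): A returns ('ok', 0), B raises IndexError
import Mathlib
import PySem

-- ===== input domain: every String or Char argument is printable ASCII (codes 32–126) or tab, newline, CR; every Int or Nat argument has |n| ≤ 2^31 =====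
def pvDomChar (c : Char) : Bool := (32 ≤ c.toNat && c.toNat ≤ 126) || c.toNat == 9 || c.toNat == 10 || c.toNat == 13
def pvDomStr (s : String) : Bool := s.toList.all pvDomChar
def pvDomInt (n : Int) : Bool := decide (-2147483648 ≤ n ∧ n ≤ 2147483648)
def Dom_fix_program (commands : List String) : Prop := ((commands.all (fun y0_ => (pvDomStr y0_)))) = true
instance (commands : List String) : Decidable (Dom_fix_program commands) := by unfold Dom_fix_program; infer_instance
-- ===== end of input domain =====

-- B replaces A's per-candidate flipped re-simulation (with per-step string parsing) by one
-- recorded run of the original program plus a flip-free graph walk per candidate and a single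
-- final accumulator run; equivalence is about the RETURN value only (Python A mutates
-- `commands` in place: the successful swap stays applied; B never mutates).

-- ===== PORT A =====
-- run_code's while loop; fuel = len(commands)+1 bounds the loop (each non-breaking
-- iteration marks a fresh index); at fuel 0 / on IndexError (outside Pre_) returns junk ("", acc).
def pvRunA (cs : List String) : Nat → PySem.Dict Int Int → Int → Int → String × Int
  | 0, _, acc, _ => ("", acc)
  | fuel+1, cc, acc, i =>
    if cc.contains i then ("error", acc)
    else if (cs.length : Int) ≤ i then ("ok", acc)
    else
      let cc' := cc.insert i 1
      match PySem.List.pyGet? cs i with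
      | none => ("", acc)      -- Python IndexError (outside Pre_)
      | some command =>
        match PySem.Str.split? command " " with
        | some [operation, args] =>
          match PySem.Str.pyGet? args 0 with
          | none => ("", acc)  -- Python IndexError (outside Pre_)
          | some sign =>
            match PySem.Int.ofStr? (PySem.Str.slice args (some 1) none) with
            | none => ("", acc) -- Python ValueError (outside Pre_)
            | some value =>
              if operation = "nop" then pvRunA cs fuel cc' acc (i + 1)
              else if operation = "acc" then
                pvRunA cs fuel cc'
                  (if sign = '-' then acc - value else if sign = '+' then acc + value else acc) (i + 1)
              else if operation = "jmp" then
                pvRunA cs fuel cc' acc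
                  (if sign = '-' then i - value else if sign = '+' then i + value else i)
              else pvRunA cs fuel cc' acc i   -- no branch taken: i unchanged
        | _ => ("", acc)       -- Python ValueError on unpacking (outside Pre_)

def pvRunCode (cs : List String) : String × Int :=
  pvRunA cs (cs.length + 1) PySem.Dict.empty 0 0

-- the `for i, command in enumerate(commands)` loop; failed swaps are restored, so the
-- recursion carries the unmodified list
def pvFixLoop (cs : List String) : List (Int × String) → String × Int
  | [] => ("error", 0)
  | (i, command) :: rest =>
    if PySem.Str.isIn "nop" command then
      let r := pvRunCode (PySem.List.pySetD cs i (PySem.Str.replace command "nop" "jmp"))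
      if r.1 = "ok" then r
      else if PySem.Str.isIn "jmp" command then
        let r2 := pvRunCode (PySem.List.pySetD cs i (PySem.Str.replace command "jmp" "nop"))
        if r2.1 = "ok" then r2 else pvFixLoop cs rest
      else pvFixLoop cs rest
    else if PySem.Str.isIn "jmp" command then
      let r2 := pvRunCode (PySem.List.pySetD cs i (PySem.Str.replace command "jmp" "nop"))
      if r2.1 = "ok" then r2 else pvFixLoop cs rest
    else pvFixLoop cs rest

def fix_program (commands : List String) : String × Int :=
  pvFixLoop commands (PySem.List.enumerate commands)

-- ===== PORT B =====
def pvParse (c : String) : String × Int :=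
  match PySem.Str.split? c " " with
  | some [op, args] =>
    match PySem.Int.ofStr? (PySem.Str.slice args (some 1) none) with
    | none => ("", 0)          -- Python ValueError (outside Pre_)
    | some v =>
      match PySem.Str.pyGet? args 0 with
      | none => ("", 0)        -- Python IndexError (outside Pre_)
      | some s => (op, if s = '-' then -v else v)
  | _ => ("", 0)               -- Python ValueError on unpacking (outside Pre_)

-- _succ: the original program's successor of position x
def pvSucc (ps : List (String × Int)) (x : Int) : Int :=
  match PySem.List.pyGet? ps x with
  | some (op, v) => if op = "jmp" then x + v else x + 1
  | none => x + 1              -- Python IndexError (outside Pre_)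

-- the first `while x < n and x not in order` loop: visit order, acc, final position;
-- fuel = len+1 bounds it (each iteration records a fresh position); junk result at fuel 0
def pvScan (ps : List (String × Int)) : Nat → PySem.Dict Int Int → Int → Int → PySem.Dict Int Int × Int × Int
  | 0, ord, acc, x => (ord, acc, x)
  | f+1, ord, acc, x =>
    if (ps.length : Int) ≤ x then (ord, acc, x)
    else if ord.contains x then (ord, acc, x)
    else match PySem.List.pyGet? ps x with
      | none => (ord, acc, x)  -- Python IndexError (outside Pre_)
      | some (op, v) =>
        pvScan ps f (ord.insert x (ord.size : Int))
          (if op = "acc" then acc + v else acc)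
          (if op = "jmp" then x + v else x + 1)

-- walk(j): follow the ORIGINAL program until exit / a recorded position / a fresh cycle
def pvWalk (ps : List (String × Int)) (ord : PySem.Dict Int Int) (ok0 : Bool) :
    Nat → PySem.Set Int → Int → Bool × Option Int
  | 0, _, _ => (false, none)
  | f+1, seen, j =>
    if (ps.length : Int) ≤ j then (true, none)
    else if ord.contains j then (ok0, some j)
    else if PySem.Set.contains seen j then (false, none)
    else pvWalk ps ord ok0 f (PySem.Set.add seen j) (pvSucc ps j)

-- _acc_run: one run of the program with the swap applied, returning only the accumulator
def pvAcc (ps : List (String × Int)) (swap : Nat) : Nat → PySem.Set Int → Int → Int → Int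
  | 0, _, acc, _ => acc
  | f+1, seen, acc, x =>
    if (ps.length : Int) ≤ x then acc
    else if PySem.Set.contains seen x then acc
    else match PySem.List.pyGet? ps x with
      | none => acc            -- Python IndexError (outside Pre_)
      | some (op0, v) =>
        let op := if x = (swap : Int) then (if op0 = "nop" then "jmp" else "nop") else op0
        if op = "acc" then pvAcc ps swap f (PySem.Set.add seen x) (acc + v) (x + 1)
        else if op = "jmp" then pvAcc ps swap f (PySem.Set.add seen x) acc (x + v)
        else pvAcc ps swap f (PySem.Set.add seen x) acc (x + 1)

-- the candidate loop: decide each swap by walk + visit-order comparison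
def pvSearch (ps : List (String × Int)) (ord : PySem.Dict Int Int) (acc0 : Int) (ok0 : Bool) :
    List (Int × (String × Int)) → String × Int
  | [] => ("error", 0)
  | (i, (op, v)) :: rest =>
    if op ≠ "nop" ∧ op ≠ "jmp" then pvSearch ps ord acc0 ok0 rest
    else if ord.contains i = false then
      (if ok0 then ("ok", acc0) else pvSearch ps ord acc0 ok0 rest)
    else
      let j := if op = "nop" then i + v else i + 1
      let w := pvWalk ps ord ok0 (ps.length + 1) PySem.Set.empty j
      if (w.1 && (match w.2 with
                  | none => true
                  | some m => decide (ord.getD i 0 < ord.getD m 0))) = true then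
        ("ok", pvAcc ps i.toNat (ps.length + 1) PySem.Set.empty 0 0)
      else pvSearch ps ord acc0 ok0 rest

def fix_program_alt (commands : List String) : String × Int :=
  if !(commands.any fun c => PySem.Str.isIn "nop" c || PySem.Str.isIn "jmp" c) then ("error", 0)
  else
    let prog := commands.map pvParse
    let s := pvScan prog (prog.length + 1) PySem.Dict.empty 0 0
    pvSearch prog s.1 s.2.1 (decide ((prog.length : Int) ≤ s.2.2)) (PySem.List.enumerate prog)

-- ===== PRECONDITION & SPEC =====
-- well-formed instruction "op ±digits" at index k; backward jumps (and backward nops, which a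
-- swap turns into jumps) must not jump below index 0
def pvWfSafe (k : Nat) (c : String) : Bool :=
  match c.toList with
  | o1 :: o2 :: o3 :: ' ' :: s :: ds =>
      (decide ([o1,o2,o3] = ['n','o','p'] ∨ [o1,o2,o3] = ['a','c','c'] ∨ [o1,o2,o3] = ['j','m','p'])) &&
      (decide (s = '+' ∨ s = '-')) && (decide (ds ≠ [])) && ds.all Char.isDigit &&
      (match PySem.Int.ofChars? ds with
       | some v => decide (0 ≤ v) &&
           (decide (¬(([o1,o2,o3] = ['n','o','p'] ∨ [o1,o2,o3] = ['j','m','p']) ∧ s = '-')) || decide (v ≤ (k : Int)))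
       | none => false)
  | _ => false

-- B's graph search must parse and survey the WHOLE program up front, which a closed-form
-- precondition cannot trade against A's lazy, execution-dependent parsing: Pre_ admits
-- programs with no "nop"/"jmp" text at all (neither side runs anything) and programs made
-- only of well-formed instructions whose backward nop/jmp offsets stay inside the program;
-- it excludes inputs where A returns only thanks to never reaching a malformed instruction
-- (B's up-front parse raises ValueError there) or thanks to Python's negative-index
-- wraparound (where B's bookkeeping walks off the left end and raises IndexError).
def Pre_fix_program (commands : List String) : Prop :=
  (commands.all (fun c => !(PySem.Str.isIn "nop" c) && !(PySem.Str.isIn "jmp" c)) = true)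
  ∨ ((List.range commands.length).all (fun k => pvWfSafe k (commands.getD k "")) = true)
instance (commands : List String) : Decidable (Pre_fix_program commands) := by
  unfold Pre_fix_program; infer_instance

def pvWitness_fix_program : List String := ["nop +0", "acc +1", "jmp -2"]

def Spec_fix_program (commands : List String) (out : String × Int) : Prop := out = fix_program_alt commands
instance (commands : List String) (out : String × Int) : Decidable (Spec_fix_program commands out) := by
  unfold Spec_fix_program; infer_instance

-- ===== CLAIM (what is proved, stated in full; the proofs are below) =====
def Claim_equal_fix_program : Prop := ∀ (commands : List String), Dom_fix_program commands → Pre_fix_program commands → Spec_fix_program commands (fix_program commands)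

-- ===== LEMMAS AND PROOFS =====

-- proof-side runners: pvRunB simulates the program parsed once with the swap applied on the
-- fly (the bridge between A's string-level run and B's graph analysis), pvRun is the same
-- runner without any swap, pvTryAll is A's candidate loop expressed over the parsed program
def pvRunB (prog : List (String × Int)) (swapAt : Int) : Nat → PySem.Set Int → Int → Int → String × Int
  | 0, _, acc, _ => ("", acc)
  | fuel+1, seen, acc, i =>
    if PySem.Set.contains seen i then ("error", acc)
    else if (prog.length : Int) ≤ i then ("ok", acc)
    else
      let seen' := PySem.Set.add seen i
      match PySem.List.pyGet? prog i with
      | none => ("", acc)      -- Python IndexError (outside Pre_)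
      | some (op0, val) =>
        let op := if i = swapAt then (if op0 = "nop" then "jmp" else "nop") else op0
        if op = "acc" then pvRunB prog swapAt fuel seen' (acc + val) (i + 1)
        else if op = "jmp" then pvRunB prog swapAt fuel seen' acc (i + val)
        else pvRunB prog swapAt fuel seen' acc (i + 1)

def pvRun (prog : List (String × Int)) : Nat → PySem.Set Int → Int → Int → String × Int
  | 0, _, acc, _ => ("", acc)
  | fuel+1, seen, acc, i =>
    if PySem.Set.contains seen i then ("error", acc)
    else if (prog.length : Int) ≤ i then ("ok", acc)
    else
      match PySem.List.pyGet? prog i with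
      | none => ("", acc)
      | some (op, val) =>
        if op = "acc" then pvRun prog fuel (PySem.Set.add seen i) (acc + val) (i + 1)
        else if op = "jmp" then pvRun prog fuel (PySem.Set.add seen i) acc (i + val)
        else pvRun prog fuel (PySem.Set.add seen i) acc (i + 1)

def pvTryAll (prog : List (String × Int)) : List (Int × (String × Int)) → String × Int
  | [] => ("error", 0)
  | (j, (op, _)) :: rest =>
    if op = "nop" ∨ op = "jmp" then
      let r := pvRunB prog j (prog.length + 1) PySem.Set.empty 0 0
      if r.1 = "ok" then r else pvTryAll prog rest
    else pvTryAll prog rest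


theorem pvSplitOnGo_noSep : ∀ (fuel : Nat) (l cur : List Char) (acc : List (List Char)), (∀ x ∈ l, x ≠ ' ') →
    PySem.Chars.splitOn.go [' '] fuel l cur acc = ((cur.reverse ++ l) :: acc).reverse := by
  intro fuel
  induction fuel with
  | zero => intro l cur acc _; rw [PySem.Chars.splitOn.go.eq_def]
  | succ f ih =>
    intro l cur acc h
    cases l with
    | nil => rw [PySem.Chars.splitOn.go.eq_def]; simp
    | cons c t =>
      have hc : c ≠ ' ' := h c (by simp)
      have hpre : [' '].isPrefixOf (c :: t) = false := by
        simp [List.isPrefixOf]; exact fun hh => absurd hh.symm hc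
      rw [PySem.Chars.splitOn.go.eq_def]
      simp only [hpre]
      rw [ih t (c :: cur) acc (fun x hx => h x (by simp [hx]))]
      simp

theorem pvSplitOnGo_mid : ∀ (xs : List Char) (fuel : Nat) (ys cur : List Char) (acc : List (List Char)),
    (∀ x ∈ xs, x ≠ ' ') → (∀ x ∈ ys, x ≠ ' ') → xs.length < fuel →
    PySem.Chars.splitOn.go [' '] fuel (xs ++ ' ' :: ys) cur acc
      = (ys :: (cur.reverse ++ xs) :: acc).reverse := by
  intro xs
  induction xs with
  | nil =>
    intro fuel ys cur acc _ hys hf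
    cases fuel with
    | zero => omega
    | succ f =>
      rw [PySem.Chars.splitOn.go.eq_def]
      have hpre : [' '].isPrefixOf (' ' :: ys) = true := by simp [List.isPrefixOf]
      simp only [List.nil_append, hpre, if_true]
      rw [show List.drop [' '].length (' ' :: ys) = ys from rfl]
      rw [pvSplitOnGo_noSep f ys [] (cur.reverse :: acc) hys]
      simp
  | cons c xs' ih =>
    intro fuel ys cur acc hxs hys hf
    cases fuel with
    | zero => simp at hf
    | succ f =>
      have hc : c ≠ ' ' := hxs c (by simp)
      have hpre : [' '].isPrefixOf (c :: (xs' ++ ' ' :: ys)) = false := by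
        simp [List.isPrefixOf]; exact fun hh => absurd hh.symm hc
      rw [PySem.Chars.splitOn.go.eq_def]
      simp only [List.cons_append, hpre]
      rw [ih f ys (c :: cur) acc (fun x hx => hxs x (by simp [hx])) hys (by simpa using Nat.lt_of_succ_lt_succ hf)]
      simp

theorem pvSplitOn_two (xs ys : List Char) (hxs : ∀ x ∈ xs, x ≠ ' ') (hys : ∀ x ∈ ys, x ≠ ' ') :
    PySem.Chars.splitOn (xs ++ ' ' :: ys) [' '] = [xs, ys] := by
  rw [PySem.Chars.splitOn]
  rw [pvSplitOnGo_mid xs ((xs ++ ' ' :: ys).length + 1) ys [] [] hxs hys (by simp)]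
  simp

theorem pvReplaceGo_skip (a : Char) (ol nw : List Char) : ∀ (fuel : Nat) (l acc : List Char), a ∉ l →
    PySem.Chars.replace.go (a :: ol) nw fuel l acc = acc.reverse ++ l := by
  intro fuel
  induction fuel with
  | zero => intro l acc _; rw [PySem.Chars.replace.go.eq_def]
  | succ f ih =>
    intro l acc h
    cases l with
    | nil => rw [PySem.Chars.replace.go.eq_def]; simp
    | cons c t =>
      have hc : a ≠ c := fun hh => h (by simp [hh])
      have hpre : (a :: ol).isPrefixOf (c :: t) = false := by
        simp [List.isPrefixOf]; intro hh; exact absurd hh hc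
      rw [PySem.Chars.replace.go.eq_def]
      simp only [hpre]
      rw [ih t (c :: acc) (fun hx => h (by simp [hx]))]
      simp

-- replacing the 3-char opcode at the head when its first char does not recur
theorem pvReplace_head (a b d a' b' d' : Char) (rest : List Char) (h : a ∉ rest) :
    PySem.Chars.replace (a :: b :: d :: rest) [a, b, d] [a', b', d'] = a' :: b' :: d' :: rest := by
  rw [PySem.Chars.replace]
  rw [if_neg (by simp)]
  rw [PySem.Chars.replace.go.eq_def]
  have hpre : [a, b, d].isPrefixOf (a :: b :: d :: rest) = true := by simp [List.isPrefixOf]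
  simp only [List.length_cons, hpre, if_true]
  rw [show List.drop ([].length + 1 + 1 + 1) (a :: b :: d :: rest) = rest from rfl]
  rw [pvReplaceGo_skip a [b, d] [a', b', d'] _ rest _ h]
  simp

theorem pvSplitCmd (c : String) (o1 o2 o3 s : Char) (ds : List Char)
    (hc : c.toList = o1 :: o2 :: o3 :: ' ' :: s :: ds)
    (hop : o1 ≠ ' ' ∧ o2 ≠ ' ' ∧ o3 ≠ ' ') (hs : s ≠ ' ') (hds : ∀ d ∈ ds, d ≠ ' ') :
    PySem.Str.split? c " " = some [String.ofList [o1, o2, o3], String.ofList (s :: ds)] := by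
  rw [PySem.Str.split?.eq_1, hc]
  rw [show (" " : String).toList = [' '] from rfl]
  rw [PySem.Chars.split?.eq_1]
  rw [if_neg (by simp)]
  rw [show o1 :: o2 :: o3 :: ' ' :: s :: ds = [o1, o2, o3] ++ ' ' :: (s :: ds) from rfl]
  rw [pvSplitOn_two [o1, o2, o3] (s :: ds) (by simpa using hop)
    (by intro x hx; rcases List.mem_cons.mp hx with h | h; exacts [h ▸ hs, hds x h])]
  simp

theorem pvArgGet (s : Char) (ds : List Char) :
    PySem.Str.pyGet? (String.ofList (s :: ds)) 0 = some s := by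
  have : ((0 : Int)) = ((0 : Nat) : Int) := rfl
  rw [this, PySem.Str.pyGet?_natCast, String.toList_ofList]
  simp

theorem pvArgVal (s : Char) (ds : List Char) :
    PySem.Int.ofStr? (PySem.Str.slice (String.ofList (s :: ds)) (some 1) none) = PySem.Int.ofChars? ds := by
  rw [PySem.Int.ofStr?]
  rw [PySem.Str.toList_slice, String.toList_ofList]
  rw [PySem.Chars.slice_eq_listSlice]
  rw [PySem.List.slice_from (s :: ds) (a := 1) (by norm_num)]
  rfl

theorem pvDigitNe (d : Char) (h : d.isDigit = true) : d ≠ ' ' ∧ d ≠ 'n' ∧ d ≠ 'o' ∧ d ≠ 'j' := by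
  refine ⟨?_, ?_, ?_, ?_⟩ <;> rintro rfl <;> exact absurd h (by decide)

theorem pvWf_unpack (k : Nat) (c : String) (h : pvWfSafe k c = true) :
    ∃ o1 o2 o3 s ds v, c.toList = o1 :: o2 :: o3 :: ' ' :: s :: ds ∧
      ([o1,o2,o3] = ['n','o','p'] ∨ [o1,o2,o3] = ['a','c','c'] ∨ [o1,o2,o3] = ['j','m','p']) ∧
      (s = '+' ∨ s = '-') ∧ ds ≠ [] ∧ (∀ d ∈ ds, d.isDigit = true) ∧
      PySem.Int.ofChars? ds = some v ∧ 0 ≤ v ∧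
      ((([o1,o2,o3] = ['n','o','p'] ∨ [o1,o2,o3] = ['j','m','p']) ∧ s = '-') → v ≤ (k : Int)) := by
  unfold pvWfSafe at h
  split at h
  case _ o1 o2 o3 s ds heq =>
    simp only [Bool.and_eq_true, decide_eq_true_eq, List.all_eq_true] at h
    obtain ⟨⟨⟨⟨hop, hs⟩, hne⟩, hdig⟩, hv⟩ := h
    split at hv
    case _ v heqv =>
      simp only [Bool.and_eq_true, Bool.or_eq_true, decide_eq_true_eq] at hv
      exact ⟨o1, o2, o3, s, ds, v, heq, hop, hs, hne, hdig, heqv, hv.1,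
        fun hc => (hv.2.resolve_left (by simpa using hc))⟩
    case _ => exact absurd hv (by simp)
  case _ => exact absurd h (by simp)

theorem pvOpNoSpace (o1 o2 o3 : Char)
    (hop : [o1,o2,o3] = ['n','o','p'] ∨ [o1,o2,o3] = ['a','c','c'] ∨ [o1,o2,o3] = ['j','m','p']) :
    o1 ≠ ' ' ∧ o2 ≠ ' ' ∧ o3 ≠ ' ' := by
  rcases hop with h | h | h <;> simp only [List.cons.injEq, and_true] at h <;> obtain ⟨rfl, rfl, rfl⟩ := h <;> exact ⟨by decide, by decide, by decide⟩

theorem pvParse_eval (c : String) (o1 o2 o3 s : Char) (ds : List Char) (v : Int)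
    (hc : c.toList = o1 :: o2 :: o3 :: ' ' :: s :: ds)
    (hop : [o1,o2,o3] = ['n','o','p'] ∨ [o1,o2,o3] = ['a','c','c'] ∨ [o1,o2,o3] = ['j','m','p'])
    (hs : s = '+' ∨ s = '-') (hdig : ∀ d ∈ ds, d.isDigit = true)
    (hv : PySem.Int.ofChars? ds = some v) :
    pvParse c = (String.ofList [o1, o2, o3], if s = '-' then -v else v) := by
  obtain ⟨h1, h2, h3⟩ := pvOpNoSpace o1 o2 o3 hop
  unfold pvParse
  rw [pvSplitCmd c o1 o2 o3 s ds hc ⟨h1, h2, h3⟩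
      (by rcases hs with h | h <;> subst h <;> decide)
      (fun d hd => (pvDigitNe d (hdig d hd)).1)]
  simp only [pvArgVal, hv, pvArgGet]

theorem pvIsIn_prefix (sub c : String) (x y z : Char) (rest : List Char)
    (hsub : sub.toList = [x, y, z]) (hc : c.toList = x :: y :: z :: rest) :
    PySem.Str.isIn sub c = true := by
  rw [PySem.Str.isIn_iff_infix, hsub, hc]
  exact ⟨[], rest, by simp⟩

theorem pvIsIn_absent (sub c : String) (a : Char) (ha : a ∈ sub.toList) (hc : a ∉ c.toList) :
    PySem.Str.isIn sub c = false := by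
  cases h : PySem.Str.isIn sub c
  · rfl
  · exact absurd ((PySem.Str.isIn_iff_infix sub c).mp h |>.subset ha) hc

theorem pvSetAddContains (seen : PySem.Set Int) (i x : Int) :
    PySem.Set.contains (PySem.Set.add seen i) x = (x == i || PySem.Set.contains seen x) := by
  by_cases hxi : x = i
  · subst hxi
    simp only [BEq.rfl, Bool.true_or]
    exact (PySem.Set.contains_iff _ _).mpr ((PySem.Set.mem_add _ _ _).mpr (Or.inr rfl))
  · have hbeq : (x == i) = false := beq_eq_false_iff_ne.mpr hxi
    simp only [hbeq, Bool.false_or]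
    cases h : PySem.Set.contains seen x
    · cases h2 : PySem.Set.contains (PySem.Set.add seen i) x
      · rfl
      · rcases (PySem.Set.mem_add _ _ _).mp ((PySem.Set.contains_iff _ _).mp h2) with hm | hm
        · exact absurd ((PySem.Set.contains_iff _ _).mpr hm) (by rw [h]; simp)
        · exact absurd hm hxi
    · exact (PySem.Set.contains_iff _ _).mpr ((PySem.Set.mem_add _ _ _).mpr (Or.inl ((PySem.Set.contains_iff _ _).mp h)))

def pvStepOK (cs' : List String) (ps : List (String × Int)) (j : Int) (k : Nat) : Prop :=
  ∃ opr args s v,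
    PySem.Str.split? (cs'.getD k "") " " = some [opr, args] ∧
    PySem.Str.pyGet? args 0 = some s ∧
    PySem.Int.ofStr? (PySem.Str.slice args (some 1) none) = some v ∧
    (opr = "nop" ∨ opr = "acc" ∨ opr = "jmp") ∧ (s = '+' ∨ s = '-') ∧
    (if (k : Int) = j then (if (ps.getD k ("", 0)).1 = "nop" then "jmp" else "nop")
      else (ps.getD k ("", 0)).1) = opr ∧
    (ps.getD k ("", 0)).2 = (if s = '-' then -v else v) ∧
    (opr = "jmp" → 0 ≤ (k : Int) + (if s = '-' then -v else v))

theorem pvLockstep (cs' : List String) (ps : List (String × Int)) (j : Int)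
    (hlen : ps.length = cs'.length)
    (hok : ∀ k : Nat, k < cs'.length → pvStepOK cs' ps j k) :
    ∀ (fuel : Nat) (cc : PySem.Dict Int Int) (seen : PySem.Set Int) (acc i : Int),
      0 ≤ i → (∀ x, cc.contains x = PySem.Set.contains seen x) →
      pvRunA cs' fuel cc acc i = pvRunB ps j fuel seen acc i := by
  intro fuel
  induction fuel with
  | zero => intro cc seen acc i _ _; rfl
  | succ f ih =>
    intro cc seen acc i hi hinv
    rw [pvRunA, pvRunB, hinv i, hlen]
    cases hmem : PySem.Set.contains seen i
    · simp only [Bool.false_eq_true, if_false]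
      by_cases hlen2 : (cs'.length : Int) ≤ i
      · simp only [hlen2, if_true]
      · simp only [hlen2, if_false]
        have hk : i.toNat < cs'.length := by omega
        have hik : ((i.toNat : Nat) : Int) = i := Int.toNat_of_nonneg hi
        obtain ⟨opr, args, s, v, hsplit, hget, hofs, hops, hs, heff, hval, hsafe⟩ := hok i.toNat hk
        have hga : PySem.List.pyGet? cs' i = some (cs'.getD i.toNat "") := by
          rw [PySem.List.pyGet?_of_nonneg cs' hi, List.getElem?_eq_getElem hk,
            List.getD_eq_getElem cs' "" hk]
        have hgb : PySem.List.pyGet? ps i = some (ps.getD i.toNat ("", 0)) := by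
          rw [PySem.List.pyGet?_of_nonneg ps hi, List.getElem?_eq_getElem (hlen ▸ hk),
            List.getD_eq_getElem ps ("", 0) (hlen ▸ hk)]
        rcases hps : ps.getD i.toNat ("", 0) with ⟨op0, val⟩
        rw [hps] at heff hval
        simp only at heff hval
        rw [hga, hgb, hps]
        simp only [hsplit, hget, hofs]
        have hinv' : ∀ x, (cc.insert i 1).contains x = PySem.Set.contains (PySem.Set.add seen i) x := by
          intro x
          rw [PySem.Dict.contains_insert, pvSetAddContains, hinv x]
        have heffi : (if i = j then (if op0 = "nop" then "jmp" else "nop") else op0) = opr := by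
          rw [← hik]; exact heff
        rw [heffi]
        rcases hops with rfl | rfl | rfl
        · -- "nop"
          rw [if_pos rfl]
          rw [if_neg (by decide), if_neg (by decide)]
          exact ih _ _ _ (i + 1) (by omega) hinv'
        · -- "acc"
          rw [if_neg (by decide), if_pos rfl, if_pos rfl]
          have hacc : (if s = '-' then acc - v else if s = '+' then acc + v else acc) = acc + val := by
            rcases hs with rfl | rfl
            · rw [if_neg (by decide), if_pos rfl, hval, if_neg (by decide)]
            · rw [if_pos rfl, hval, if_pos rfl]; ring
          rw [hacc]
          exact ih _ _ _ (i + 1) (by omega) hinv'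
        · -- "jmp"
          simp only [reduceIte]
          have hjmp : (if s = '-' then i - v else if s = '+' then i + v else i) = i + val := by
            rcases hs with rfl | rfl
            · rw [if_neg (by decide), if_pos rfl, hval, if_neg (by decide)]
            · rw [if_pos rfl, hval, if_pos rfl]; ring
          rw [hjmp]
          refine ih _ _ _ (i + val) ?_ hinv'
          have := hsafe rfl
          rw [← hval] at this
          omega
    · simp only [if_true]

theorem pvDecode_parse (c : String) (k : Nat) (hwf : pvWfSafe k c = true) :
    ∃ o1 o2 o3 s ds v,
      c.toList = o1 :: o2 :: o3 :: ' ' :: s :: ds ∧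
      ([o1,o2,o3] = ['n','o','p'] ∨ [o1,o2,o3] = ['a','c','c'] ∨ [o1,o2,o3] = ['j','m','p']) ∧
      (s = '+' ∨ s = '-') ∧ (∀ d ∈ ds, d.isDigit = true) ∧
      PySem.Int.ofChars? ds = some v ∧ 0 ≤ v ∧
      ((([o1,o2,o3] = ['n','o','p'] ∨ [o1,o2,o3] = ['j','m','p']) ∧ s = '-') → v ≤ (k : Int)) ∧
      PySem.Str.split? c " " = some [String.ofList [o1, o2, o3], String.ofList (s :: ds)] ∧
      pvParse c = (String.ofList [o1, o2, o3], if s = '-' then -v else v) := by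
  obtain ⟨o1, o2, o3, s, ds, v, hc, hop, hs, _, hdig, hv, hv0, hsafe⟩ := pvWf_unpack k c hwf
  exact ⟨o1, o2, o3, s, ds, v, hc, hop, hs, hdig, hv, hv0, hsafe,
    pvSplitCmd c o1 o2 o3 s ds hc (pvOpNoSpace o1 o2 o3 hop)
      (by rcases hs with rfl | rfl <;> decide) (fun d hd => (pvDigitNe d (hdig d hd)).1),
    pvParse_eval c o1 o2 o3 s ds v hc hop hs hdig hv⟩

theorem pvGetDMap (cs : List String) (k : Nat) (hk : k < cs.length) :
    (cs.map pvParse).getD k ("", 0) = pvParse (cs.getD k "") := by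
  rw [List.getD_eq_getElem _ _ (by simpa using hk), List.getD_eq_getElem _ _ hk, List.getElem_map]

theorem pvGetDSet_ne (cs : List String) (m k : Nat) (x : String) (hk : k < cs.length) (hne : k ≠ m) :
    (cs.set m x).getD k "" = cs.getD k "" := by
  rw [List.getD_eq_getElem _ _ (by simpa using hk), List.getD_eq_getElem _ _ hk,
    List.getElem_set_ne (by omega)]

theorem pvGetDSet_self (cs : List String) (m : Nat) (x : String) (hm : m < cs.length) :
    (cs.set m x).getD m "" = x := by
  rw [List.getD_eq_getElem _ _ (by simpa using hm), List.getElem_set_self]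

theorem pvStepOK_swapNop (cs : List String)
    (h2 : ∀ k, k < cs.length → pvWfSafe k (cs.getD k "") = true)
    (m : Nat) (hm : m < cs.length) (sm : Char) (dsm : List Char)
    (hms : (cs.getD m "").toList = 'n' :: 'o' :: 'p' :: ' ' :: sm :: dsm) :
    ∀ k, k < cs.length →
      pvStepOK (cs.set m (PySem.Str.replace (cs.getD m "") "nop" "jmp")) (cs.map pvParse) (m : Int) k := by
  intro k hk
  obtain ⟨o1, o2, o3, s, ds, v, hc, hop, hs, hdig, hv, hv0, hsafe, hsplit, hparse⟩ :=
    pvDecode_parse (cs.getD k "") k (h2 k hk)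
  rw [pvStepOK]
  by_cases hkm : k = m
  · subst hkm
    rw [hms] at hc
    obtain ⟨rfl, rfl, rfl, rfl, rfl⟩ : o1 = 'n' ∧ o2 = 'o' ∧ o3 = 'p' ∧ s = sm ∧ ds = dsm := by
      simpa using hc.symm
    have hrep : (PySem.Str.replace (cs.getD k "") "nop" "jmp").toList
        = 'j' :: 'm' :: 'p' :: ' ' :: s :: ds := by
      rw [PySem.Str.toList_replace, hms]
      rw [show ("nop" : String).toList = ['n', 'o', 'p'] from rfl,
        show ("jmp" : String).toList = ['j', 'm', 'p'] from rfl]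
      refine pvReplace_head 'n' 'o' 'p' 'j' 'm' 'p' (' ' :: s :: ds) ?_
      intro hmem
      simp only [List.mem_cons] at hmem
      rcases hmem with h | h | h
      · exact absurd h (by decide)
      · rcases hs with rfl | rfl <;> exact absurd h (by decide)
      · exact absurd (hdig _ h) (by decide)
    refine ⟨"jmp", String.ofList (s :: ds), s, v, ?_, pvArgGet s ds, pvArgVal s ds ▸ hv, ?_, hs, ?_, ?_, ?_⟩
    · rw [pvGetDSet_self cs k _ hm]
      have := pvSplitCmd (PySem.Str.replace (cs.getD k "") "nop" "jmp") 'j' 'm' 'p' s ds hrep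
        ⟨by decide, by decide, by decide⟩ (by rcases hs with rfl | rfl <;> decide)
        (fun d hd => (pvDigitNe d (hdig d hd)).1)
      simpa using this
    · exact Or.inr (Or.inr rfl)
    · rw [if_pos rfl, pvGetDMap cs k hm, hparse]
      simp
    · rw [pvGetDMap cs k hm, hparse]
    · intro _
      rcases hs with rfl | rfl
      · rw [if_neg (by decide : ¬('+' : Char) = '-')]; omega
      · have hvk := hsafe ⟨Or.inl rfl, rfl⟩
        rw [if_pos rfl]; omega
  · refine ⟨String.ofList [o1, o2, o3], String.ofList (s :: ds), s, v, ?_,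
      pvArgGet s ds, pvArgVal s ds ▸ hv, ?_, hs, ?_, ?_, ?_⟩
    · rw [pvGetDSet_ne cs m k _ hk hkm]; exact hsplit
    · rcases hop with h | h | h <;> rw [h] <;> decide
    · rw [if_neg (by exact_mod_cast hkm), pvGetDMap cs k hk, hparse]
    · rw [pvGetDMap cs k hk, hparse]
    · intro hjmp
      have hop3 : [o1, o2, o3] = ['j', 'm', 'p'] := by
        rcases hop with h | h | h <;> rw [h] at hjmp ⊢ <;> first | rfl | exact absurd hjmp (by decide)
      rcases hs with rfl | rfl
      · rw [if_neg (by decide : ¬('+' : Char) = '-')]; omega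
      · have hvk := hsafe ⟨Or.inr hop3, rfl⟩
        rw [if_pos rfl]; omega

theorem pvStepOK_swapJmp (cs : List String)
    (h2 : ∀ k, k < cs.length → pvWfSafe k (cs.getD k "") = true)
    (m : Nat) (hm : m < cs.length) (sm : Char) (dsm : List Char)
    (hms : (cs.getD m "").toList = 'j' :: 'm' :: 'p' :: ' ' :: sm :: dsm) :
    ∀ k, k < cs.length →
      pvStepOK (cs.set m (PySem.Str.replace (cs.getD m "") "jmp" "nop")) (cs.map pvParse) (m : Int) k := by
  intro k hk
  obtain ⟨o1, o2, o3, s, ds, v, hc, hop, hs, hdig, hv, hv0, hsafe, hsplit, hparse⟩ :=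
    pvDecode_parse (cs.getD k "") k (h2 k hk)
  rw [pvStepOK]
  by_cases hkm : k = m
  · subst hkm
    rw [hms] at hc
    obtain ⟨rfl, rfl, rfl, rfl, rfl⟩ : o1 = 'j' ∧ o2 = 'm' ∧ o3 = 'p' ∧ s = sm ∧ ds = dsm := by
      simpa using hc.symm
    have hrep : (PySem.Str.replace (cs.getD k "") "jmp" "nop").toList
        = 'n' :: 'o' :: 'p' :: ' ' :: s :: ds := by
      rw [PySem.Str.toList_replace, hms]
      rw [show ("jmp" : String).toList = ['j', 'm', 'p'] from rfl,
        show ("nop" : String).toList = ['n', 'o', 'p'] from rfl]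
      refine pvReplace_head 'j' 'm' 'p' 'n' 'o' 'p' (' ' :: s :: ds) ?_
      intro hmem
      simp only [List.mem_cons] at hmem
      rcases hmem with h | h | h
      · exact absurd h (by decide)
      · rcases hs with rfl | rfl <;> exact absurd h (by decide)
      · exact absurd (hdig _ h) (by decide)
    refine ⟨"nop", String.ofList (s :: ds), s, v, ?_, pvArgGet s ds, pvArgVal s ds ▸ hv, ?_, hs, ?_, ?_, ?_⟩
    · rw [pvGetDSet_self cs k _ hm]
      have := pvSplitCmd (PySem.Str.replace (cs.getD k "") "jmp" "nop") 'n' 'o' 'p' s ds hrep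
        ⟨by decide, by decide, by decide⟩ (by rcases hs with rfl | rfl <;> decide)
        (fun d hd => (pvDigitNe d (hdig d hd)).1)
      simpa using this
    · exact Or.inl rfl
    · rw [if_pos rfl, pvGetDMap cs k hm, hparse]
      simp
    · rw [pvGetDMap cs k hm, hparse]
    · intro h
      exact absurd h (by decide)
  · refine ⟨String.ofList [o1, o2, o3], String.ofList (s :: ds), s, v, ?_,
      pvArgGet s ds, pvArgVal s ds ▸ hv, ?_, hs, ?_, ?_, ?_⟩
    · rw [pvGetDSet_ne cs m k _ hk hkm]; exact hsplit
    · rcases hop with h | h | h <;> rw [h] <;> decide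
    · rw [if_neg (by exact_mod_cast hkm), pvGetDMap cs k hk, hparse]
    · rw [pvGetDMap cs k hk, hparse]
    · intro hjmp
      have hop3 : [o1, o2, o3] = ['j', 'm', 'p'] := by
        rcases hop with h | h | h <;> rw [h] at hjmp ⊢ <;> first | rfl | exact absurd hjmp (by decide)
      rcases hs with rfl | rfl
      · rw [if_neg (by decide : ¬('+' : Char) = '-')]; omega
      · have hvk := hsafe ⟨Or.inr hop3, rfl⟩
        rw [if_pos rfl]; omega

theorem pvEnumMem {α : Type} (d : α) : ∀ (l : List α) (st : Int) (p : Int × α),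
    p ∈ PySem.List.enumerate l st → ∃ m : Nat, m < l.length ∧ p.1 = st + m ∧ p.2 = l.getD m d := by
  intro l
  induction l with
  | nil => intro st p hp; rw [PySem.List.enumerate_nil] at hp; exact absurd hp (by simp)
  | cons x xs ih =>
    intro st p hp
    rw [PySem.List.enumerate_cons] at hp
    rcases List.mem_cons.mp hp with rfl | hp
    · exact ⟨0, by simp⟩
    · obtain ⟨m, hm, h1, h2⟩ := ih (st + 1) p hp
      exact ⟨m + 1, by simpa using hm, by rw [h1]; push_cast; ring, by simpa using h2⟩

theorem pvEnumMap {α β : Type} (f : α → β) : ∀ (l : List α) (st : Int),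
    PySem.List.enumerate (l.map f) st = (PySem.List.enumerate l st).map (fun p => (p.1, f p.2)) := by
  intro l
  induction l with
  | nil => intro st; simp [PySem.List.enumerate_nil]
  | cons x xs ih => intro st; simp [PySem.List.enumerate_cons, ih]

theorem pvNoAlpha (c : String) (o1 o2 o3 s : Char) (ds : List Char) (a : Char)
    (hc : c.toList = o1 :: o2 :: o3 :: ' ' :: s :: ds)
    (hs : s = '+' ∨ s = '-') (hdig : ∀ d ∈ ds, d.isDigit = true)
    (h1 : a ≠ o1) (h2 : a ≠ o2) (h3 : a ≠ o3) (hsp : a ≠ ' ')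
    (hpm : a ≠ '+' ∧ a ≠ '-') (hda : a.isDigit = false) :
    a ∉ c.toList := by
  rw [hc]
  intro hmem
  simp only [List.mem_cons] at hmem
  rcases hmem with h | h | h | h | h | h
  · exact h1 h
  · exact h2 h
  · exact h3 h
  · exact hsp h
  · rcases hs with rfl | rfl
    · exact hpm.1 h
    · exact hpm.2 h
  · exact absurd (hdig a h) (by simp [hda])

theorem pvOuter (cs : List String)
    (h2 : ∀ k, k < cs.length → pvWfSafe k (cs.getD k "") = true) :
    ∀ l : List (Int × String),
      (∀ p ∈ l, ∃ m : Nat, m < cs.length ∧ p.1 = (m : Int) ∧ p.2 = cs.getD m "") →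
      pvFixLoop cs l = pvTryAll (cs.map pvParse) (l.map fun p => (p.1, pvParse p.2)) := by
  intro l
  induction l with
  | nil => intro _; rfl
  | cons p rest ih =>
    intro hl
    obtain ⟨m, hm, hp1, hp2⟩ := hl p (by simp)
    rcases p with ⟨i, c⟩
    simp only at hp1 hp2
    subst hp1; subst hp2
    have hrest : ∀ q ∈ rest, ∃ m : Nat, m < cs.length ∧ q.1 = (m : Int) ∧ q.2 = cs.getD m "" :=
      fun q hq => hl q (List.mem_cons_of_mem _ hq)
    obtain ⟨o1, o2, o3, s, ds, v, hc, hop, hs, hdig, hv, hv0, hsafe, hsplit, hparse⟩ :=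
      pvDecode_parse (cs.getD m "") m (h2 m hm)
    rw [pvFixLoop, List.map_cons, pvTryAll]
    simp only [hparse]
    rcases hop with hop3 | hop3 | hop3
    · -- nop instruction: A swaps the string to "jmp …", the parsed program swaps the opcode
      obtain ⟨rfl, rfl, rfl⟩ : o1 = 'n' ∧ o2 = 'o' ∧ o3 = 'p' := by simpa using hop3
      rw [show String.ofList ['n','o','p'] = "nop" from by decide] at hparse ⊢
      rw [if_pos (pvIsIn_prefix "nop" _ 'n' 'o' 'p' (' ' :: s :: ds) rfl hc)]
      rw [if_pos (show ("nop" : String) = "nop" ∨ ("nop" : String) = "jmp" from Or.inl rfl)]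
      simp only [PySem.List.pySetD_natCast]
      have hlset : (cs.set m (PySem.Str.replace (cs.getD m "") "nop" "jmp")).length = cs.length := by
        simp
      have hrr : pvRunCode (cs.set m (PySem.Str.replace (cs.getD m "") "nop" "jmp"))
          = pvRunB (cs.map pvParse) (m : Int) ((cs.map pvParse).length + 1) PySem.Set.empty 0 0 := by
        rw [pvRunCode, hlset, List.length_map]
        exact pvLockstep _ _ (m : Int) (by rw [hlset, List.length_map])
          (by rw [hlset]; exact pvStepOK_swapNop cs h2 m hm s ds hc)
          (cs.length + 1) PySem.Dict.empty PySem.Set.empty 0 0 (by omega)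
          (fun x => by rw [PySem.Dict.contains_empty]; rfl)
      rw [hrr]
      by_cases hok : (pvRunB (cs.map pvParse) (m : Int) ((cs.map pvParse).length + 1) PySem.Set.empty 0 0).1 = "ok"
      · rw [if_pos hok, if_pos hok]
      · rw [if_neg hok, if_neg hok]
        have hnj := pvIsIn_absent "jmp" (cs.getD m "") 'j' (by decide)
          (pvNoAlpha _ _ _ _ _ _ 'j' hc hs hdig (by decide) (by decide) (by decide) (by decide) ⟨by decide, by decide⟩ (by decide))
        rw [if_neg (by rw [hnj]; simp)]
        exact ih hrest
    · -- acc instruction: neither side tries a swap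
      obtain ⟨rfl, rfl, rfl⟩ : o1 = 'a' ∧ o2 = 'c' ∧ o3 = 'c' := by simpa using hop3
      rw [show String.ofList ['a','c','c'] = "acc" from by decide] at hparse ⊢
      have hnn := pvIsIn_absent "nop" (cs.getD m "") 'o' (by decide)
        (pvNoAlpha _ _ _ _ _ _ 'o' hc hs hdig (by decide) (by decide) (by decide) (by decide) ⟨by decide, by decide⟩ (by decide))
      have hnj := pvIsIn_absent "jmp" (cs.getD m "") 'j' (by decide)
        (pvNoAlpha _ _ _ _ _ _ 'j' hc hs hdig (by decide) (by decide) (by decide) (by decide) ⟨by decide, by decide⟩ (by decide))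
      rw [if_neg (by rw [hnn]; simp), if_neg (by rw [hnj]; simp)]
      rw [if_neg (by rintro (h | h) <;> exact absurd h (by decide))]
      exact ih hrest
    · -- jmp instruction: A swaps the string to "nop …", the parsed program swaps the opcode
      obtain ⟨rfl, rfl, rfl⟩ : o1 = 'j' ∧ o2 = 'm' ∧ o3 = 'p' := by simpa using hop3
      rw [show String.ofList ['j','m','p'] = "jmp" from by decide] at hparse ⊢
      have hnn := pvIsIn_absent "nop" (cs.getD m "") 'o' (by decide)
        (pvNoAlpha _ _ _ _ _ _ 'o' hc hs hdig (by decide) (by decide) (by decide) (by decide) ⟨by decide, by decide⟩ (by decide))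
      rw [if_neg (by rw [hnn]; simp)]
      rw [if_pos (pvIsIn_prefix "jmp" _ 'j' 'm' 'p' (' ' :: s :: ds) rfl hc)]
      rw [if_pos (show ("jmp" : String) = "nop" ∨ ("jmp" : String) = "jmp" from Or.inr rfl)]
      simp only [PySem.List.pySetD_natCast]
      have hlset : (cs.set m (PySem.Str.replace (cs.getD m "") "jmp" "nop")).length = cs.length := by
        simp
      have hrr : pvRunCode (cs.set m (PySem.Str.replace (cs.getD m "") "jmp" "nop"))
          = pvRunB (cs.map pvParse) (m : Int) ((cs.map pvParse).length + 1) PySem.Set.empty 0 0 := by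
        rw [pvRunCode, hlset, List.length_map]
        exact pvLockstep _ _ (m : Int) (by rw [hlset, List.length_map])
          (by rw [hlset]; exact pvStepOK_swapJmp cs h2 m hm s ds hc)
          (cs.length + 1) PySem.Dict.empty PySem.Set.empty 0 0 (by omega)
          (fun x => by rw [PySem.Dict.contains_empty]; rfl)
      rw [hrr]
      by_cases hok : (pvRunB (cs.map pvParse) (m : Int) ((cs.map pvParse).length + 1) PySem.Set.empty 0 0).1 = "ok"
      · rw [if_pos hok, if_pos hok]
      · rw [if_neg hok, if_neg hok]
        exact ih hrest

theorem pvFixLoop_err (cs : List String) : ∀ l : List (Int × String),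
    (∀ p ∈ l, PySem.Str.isIn "nop" p.2 = false ∧ PySem.Str.isIn "jmp" p.2 = false) →
    pvFixLoop cs l = ("error", 0) := by
  intro l
  induction l with
  | nil => intro _; rfl
  | cons p rest ih =>
    intro h
    rcases p with ⟨i, c⟩
    obtain ⟨hn, hj⟩ := h (i, c) (by simp)
    simp only at hn hj
    rw [pvFixLoop, if_neg (by rw [hn]; simp), if_neg (by rw [hj]; simp)]
    exact ih fun q hq => h q (List.mem_cons_of_mem _ hq)


-- ===== new development: scan/walk analysis =====

def pvCnt (p : Int → Bool) (n : Nat) : Nat := (List.range n).countP (fun k : Nat => p (k : Int))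

theorem pvCnt_le (p : Int → Bool) (n : Nat) : pvCnt p n ≤ n := by
  unfold pvCnt
  calc (List.range n).countP (fun k : Nat => p (k : Int)) ≤ (List.range n).length :=
        List.countP_le_length
    _ = n := List.length_range

theorem pvCnt_congr (p q : Int → Bool) (n : Nat) (h : ∀ y : Int, p y = q y) :
    pvCnt p n = pvCnt q n := by
  unfold pvCnt
  exact List.countP_congr (fun x _ => by rw [h])

theorem pvCnt_update (p q : Int → Bool) : ∀ (n : Nat) (x : Int), 0 ≤ x → x < (n : Int) →
    (∀ k : Nat, k < n → q (k : Int) = (((k : Int) == x) || p (k : Int))) →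
    p x = false → pvCnt q n = pvCnt p n + 1 := by
  intro n
  induction n with
  | zero => intro x h0 hx _ _; exact absurd hx (by omega)
  | succ m ih =>
    intro x h0 hx hq hpx
    unfold pvCnt
    rw [List.range_succ, List.countP_append, List.countP_append]
    by_cases hxm : x = (m : Int)
    · have hhead : (List.range m).countP (fun k : Nat => q (k : Int))
          = (List.range m).countP (fun k : Nat => p (k : Int)) := by
        refine List.countP_congr (fun k hk => ?_)
        have hklt : k < m := List.mem_range.mp hk
        rw [hq k (by omega)]
        have : ((k : Int) == x) = false := by
          rw [beq_eq_false_iff_ne]; omega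
        rw [this, Bool.false_or]
      have hqm : q (m : Int) = true := by
        rw [hq m (by omega), ← hxm]; simp
      have hpm : p (m : Int) = false := by rw [← hxm]; exact hpx
      simp [hhead, hqm, hpm]
    · have hxm' : x < (m : Int) := by omega
      have := ih x h0 hxm' (fun k hk => hq k (by omega)) hpx
      unfold pvCnt at this
      rw [this]
      have hqm : q (m : Int) = p (m : Int) := by
        rw [hq m (by omega)]
        have : ((m : Int) == x) = false := by rw [beq_eq_false_iff_ne]; omega
        rw [this, Bool.false_or]
      simp [hqm]
      omega

theorem pvGetSome (ps : List (String × Int)) (x : Int) (h0 : 0 ≤ x) (hlt : x < (ps.length : Int)) :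
    PySem.List.pyGet? ps x = some (ps.getD x.toNat ("", 0)) := by
  have hk : x.toNat < ps.length := by omega
  rw [PySem.List.pyGet?_of_nonneg ps h0, List.getElem?_eq_getElem hk,
    List.getD_eq_getElem ps ("", 0) hk]

-- the parsed program is made of nop/acc/jmp instructions whose nop/jmp targets stay ≥ 0
def pvProgOK (ps : List (String × Int)) : Prop :=
  ∀ k : Nat, k < ps.length →
    ((ps.getD k ("", 0)).1 = "nop" ∨ (ps.getD k ("", 0)).1 = "acc" ∨ (ps.getD k ("", 0)).1 = "jmp")
    ∧ (((ps.getD k ("", 0)).1 = "nop" ∨ (ps.getD k ("", 0)).1 = "jmp") →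
        0 ≤ (k : Int) + (ps.getD k ("", 0)).2)

theorem pvProgOK_of_wf (cs : List String)
    (h2 : ∀ k, k < cs.length → pvWfSafe k (cs.getD k "") = true) : pvProgOK (cs.map pvParse) := by
  intro k hk'
  have hk : k < cs.length := by simpa using hk'
  obtain ⟨o1, o2, o3, s, ds, v, hc, hop, hs, hdig, hv, hv0, hsafe, hsplit, hparse⟩ :=
    pvDecode_parse (cs.getD k "") k (h2 k hk)
  rw [pvGetDMap cs k hk, hparse]
  rcases hop with h3 | h3 | h3
  · obtain ⟨rfl, rfl, rfl⟩ : o1 = 'n' ∧ o2 = 'o' ∧ o3 = 'p' := by simpa using h3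
    rw [show String.ofList ['n','o','p'] = "nop" from by decide]
    refine ⟨Or.inl rfl, fun _ => ?_⟩
    rcases hs with rfl | rfl
    · rw [if_neg (by decide)]; omega
    · rw [if_pos rfl]
      have := hsafe ⟨Or.inl rfl, rfl⟩
      omega
  · obtain ⟨rfl, rfl, rfl⟩ : o1 = 'a' ∧ o2 = 'c' ∧ o3 = 'c' := by simpa using h3
    rw [show String.ofList ['a','c','c'] = "acc" from by decide]
    exact ⟨Or.inr (Or.inl rfl), fun h => by simp at h⟩
  · obtain ⟨rfl, rfl, rfl⟩ : o1 = 'j' ∧ o2 = 'm' ∧ o3 = 'p' := by simpa using h3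
    rw [show String.ofList ['j','m','p'] = "jmp" from by decide]
    refine ⟨Or.inr (Or.inr rfl), fun _ => ?_⟩
    rcases hs with rfl | rfl
    · rw [if_neg (by decide)]; omega
    · rw [if_pos rfl]
      have := hsafe ⟨Or.inr rfl, rfl⟩
      omega

theorem pvSucc_some (ps : List (String × Int)) (x : Int) (op : String) (v : Int)
    (h : PySem.List.pyGet? ps x = some (op, v)) :
    pvSucc ps x = if op = "jmp" then x + v else x + 1 := by
  simp [pvSucc, h]

theorem pvSucc_nonneg (ps : List (String × Int)) (hP : pvProgOK ps) (x : Int)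
    (h0 : 0 ≤ x) (hlt : x < (ps.length : Int)) : 0 ≤ pvSucc ps x := by
  have hg := pvGetSome ps x h0 hlt
  obtain ⟨hop, hsafe⟩ := hP x.toNat (by omega)
  rcases hpair : ps.getD x.toNat ("", 0) with ⟨op, v⟩
  rw [hpair] at hop hsafe hg
  simp only at hop hsafe
  rw [pvSucc_some ps x op v hg]
  have hxx : ((x.toNat : Nat) : Int) = x := Int.toNat_of_nonneg h0
  rcases hop with rfl | rfl | rfl
  · rw [if_neg (by decide)]; omega
  · rw [if_neg (by decide)]; omega
  · rw [if_pos rfl]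
    have := hsafe (Or.inr rfl)
    omega

-- bounds, value range and injectivity of the visit-order dictionary
def pvOrdGood (ord : PySem.Dict Int Int) (n : Nat) : Prop :=
  (∀ y, ord.contains y = true →
    (0 ≤ y ∧ y < (n : Int)) ∧ (0 ≤ ord.getD y 0 ∧ ord.getD y 0 < (ord.size : Int)))
  ∧ (∀ y z, ord.contains y = true → ord.contains z = true → ord.getD y 0 = ord.getD z 0 → y = z)

theorem pvOrdGood_empty (n : Nat) : pvOrdGood PySem.Dict.empty n := by
  constructor
  · intro y hy; rw [PySem.Dict.contains_empty] at hy; exact absurd hy (by simp)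
  · intro y z hy _ _; rw [PySem.Dict.contains_empty] at hy; exact absurd hy (by simp)

theorem pvOrdGood_insert (ord : PySem.Dict Int Int) (n : Nat) (x : Int)
    (hg : pvOrdGood ord n) (hfresh : ord.contains x = false) (h0 : 0 ≤ x) (hx : x < (n : Int)) :
    pvOrdGood (ord.insert x (ord.size : Int)) n := by
  have hsz : (ord.insert x (ord.size : Int)).size = ord.size + 1 := by
    rw [PySem.Dict.size_insert, if_neg (by simp [hfresh])]
  have hmem : ∀ y, (ord.insert x (ord.size : Int)).contains y = true →
      y = x ∨ ord.contains y = true := by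
    intro y hy
    rw [PySem.Dict.contains_insert] at hy
    simpa using hy
  have hval : ∀ y, y ≠ x → (ord.insert x (ord.size : Int)).getD y 0 = ord.getD y 0 := by
    intro y hy
    rw [PySem.Dict.getD_insert, if_neg hy]
  have hvalx : (ord.insert x (ord.size : Int)).getD x 0 = (ord.size : Int) :=
    PySem.Dict.getD_insert_self ord x (ord.size : Int) 0
  constructor
  · intro y hy
    rcases hmem y hy with rfl | hy'
    · rw [hvalx, hsz]
      exact ⟨⟨h0, hx⟩, by push_cast; omega⟩
    · have hyx : y ≠ x := by rintro rfl; rw [hfresh] at hy'; exact absurd hy' (by simp)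
      rw [hval y hyx, hsz]
      obtain ⟨hb, hv⟩ := hg.1 y hy'
      exact ⟨hb, by push_cast; omega⟩
  · intro y z hy hz hyz
    rcases hmem y hy with rfl | hy'
    · rcases hmem z hz with rfl | hz'
      · rfl
      · have hzx : z ≠ y := by rintro rfl; rw [hfresh] at hz'; exact absurd hz' (by simp)
        rw [hvalx, hval z hzx] at hyz
        have := (hg.1 z hz').2.2
        omega
    · have hyx : y ≠ x := by rintro rfl; rw [hfresh] at hy'; exact absurd hy' (by simp)
      rcases hmem z hz with rfl | hz'
      · rw [hvalx, hval y hyx] at hyz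
        have := (hg.1 y hy').2.2
        omega
      · have hzx : z ≠ x := by rintro rfl; rw [hfresh] at hz'; exact absurd hz' (by simp)
        rw [hval y hyx, hval z hzx] at hyz
        exact hg.2 y z hy' hz' hyz


-- entries already recorded survive the scan with their value
theorem pvScan_persist (ps : List (String × Int)) : ∀ (f : Nat) (ord : PySem.Dict Int Int) (acc x y : Int),
    ord.contains y = true →
    (pvScan ps f ord acc x).1.contains y = true ∧ (pvScan ps f ord acc x).1.getD y 0 = ord.getD y 0 := by
  intro f
  induction f with
  | zero => intro ord acc x y hy; exact ⟨hy, rfl⟩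
  | succ g ih =>
    intro ord acc x y hy
    rw [pvScan]
    by_cases h1 : (ps.length : Int) ≤ x
    · rw [if_pos h1]; exact ⟨hy, rfl⟩
    rw [if_neg h1]
    by_cases h2 : ord.contains x = true
    · rw [if_pos h2]; exact ⟨hy, rfl⟩
    rw [if_neg h2]
    rcases hget : PySem.List.pyGet? ps x with _ | ⟨op, v⟩
    · simp only [hget]; exact ⟨hy, by simp⟩
    · simp only [hget]
      have hyx : y ≠ x := by rintro rfl; exact h2 hy
      have hy' : (ord.insert x (ord.size : Int)).contains y = true := by
        rw [PySem.Dict.contains_insert]; simp [hy]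
      obtain ⟨hc, hv⟩ := ih (ord.insert x (ord.size : Int))
        (if op = "acc" then acc + v else acc) (if op = "jmp" then x + v else x + 1) y hy'
      refine ⟨hc, ?_⟩
      rw [hv, PySem.Dict.getD_insert, if_neg hyx]

-- entries the scan adds get values at least the current size
theorem pvScan_new (ps : List (String × Int)) : ∀ (f : Nat) (ord : PySem.Dict Int Int) (acc x y : Int),
    (pvScan ps f ord acc x).1.contains y = true →
    ord.contains y = true ∨ ((ord.size : Int) ≤ (pvScan ps f ord acc x).1.getD y 0) := by
  intro f
  induction f with
  | zero => intro ord acc x y hy; exact Or.inl hy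
  | succ g ih =>
    intro ord acc x y hy
    rw [pvScan] at hy ⊢
    by_cases h1 : (ps.length : Int) ≤ x
    · rw [if_pos h1] at hy; exact Or.inl hy
    rw [if_neg h1] at hy ⊢
    by_cases h2 : ord.contains x = true
    · rw [if_pos h2] at hy; exact Or.inl hy
    rw [if_neg h2] at hy ⊢
    rcases hget : PySem.List.pyGet? ps x with _ | ⟨op, v⟩
    · simp only [hget] at hy ⊢; exact Or.inl hy
    · simp only [hget] at hy ⊢
      rcases ih (ord.insert x (ord.size : Int)) (if op = "acc" then acc + v else acc)
          (if op = "jmp" then x + v else x + 1) y hy with hc | hle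
      · rw [PySem.Dict.contains_insert] at hc
        rcases (by simpa using hc : y = x ∨ ord.contains y = true) with heq | hc'
        · subst heq
          right
          have hp := (pvScan_persist ps g (ord.insert y (ord.size : Int))
            (if op = "acc" then acc + v else acc) (if op = "jmp" then y + v else y + 1) y
            (by rw [PySem.Dict.contains_insert]; simp)).2
          rw [hp, PySem.Dict.getD_insert_self]
        · exact Or.inl hc'
      · right
        have hsz : (ord.insert x (ord.size : Int)).size = ord.size + 1 := by
          rw [PySem.Dict.size_insert, if_neg (by simp [h2])]
        rw [hsz] at hle
        push_cast at hle ⊢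
        omega

theorem pvStep_nonneg (ps : List (String × Int)) (hP : pvProgOK ps) (x : Int) (h0 : 0 ≤ x)
    (hlt : x < (ps.length : Int)) (op : String) (v : Int)
    (hget : PySem.List.pyGet? ps x = some (op, v)) :
    0 ≤ (if op = "jmp" then x + v else x + 1) := by
  rw [← pvSucc_some ps x op v hget]
  exact pvSucc_nonneg ps hP x h0 hlt

-- with enough fuel the scan ends at an exit position or a revisited one
theorem pvScan_term (ps : List (String × Int)) (hP : pvProgOK ps) : ∀ (f : Nat) (ord : PySem.Dict Int Int) (acc x : Int),
    0 ≤ x → ps.length < f + pvCnt (fun y => ord.contains y) ps.length →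
    ((ps.length : Int) ≤ (pvScan ps f ord acc x).2.2
      ∨ (pvScan ps f ord acc x).1.contains (pvScan ps f ord acc x).2.2 = true) := by
  intro f
  induction f with
  | zero =>
    intro ord acc x _ hcnt
    have := pvCnt_le (fun y => ord.contains y) ps.length
    omega
  | succ g ih =>
    intro ord acc x hx hcnt
    rw [pvScan]
    by_cases h1 : (ps.length : Int) ≤ x
    · rw [if_pos h1]; exact Or.inl h1
    rw [if_neg h1]
    by_cases h2 : ord.contains x = true
    · rw [if_pos h2]; exact Or.inr h2
    rw [if_neg h2]
    rcases hget : PySem.List.pyGet? ps x with _ | ⟨op, v⟩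
    · exact absurd (pvGetSome ps x hx (by omega)) (by simp [hget])
    · simp only [hget]
      refine ih (ord.insert x (ord.size : Int)) _ _ ?_ ?_
      · exact pvStep_nonneg ps hP x hx (by omega) op v hget
      · have hbump : pvCnt (fun y => (ord.insert x (ord.size : Int)).contains y) ps.length
            = pvCnt (fun y => ord.contains y) ps.length + 1 := by
          refine pvCnt_update (fun y => ord.contains y) _ ps.length x hx (by omega) ?_ (by simpa using h2)
          intro k _
          rw [PySem.Dict.contains_insert]
        omega

-- the set of scanned positions is closed under the successor map, up to the stopping position
theorem pvScan_closed (ps : List (String × Int)) : ∀ (f : Nat) (ord : PySem.Dict Int Int) (acc x : Int),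
    (∀ z, ord.contains z = true → (ord.contains (pvSucc ps z) = true ∨ pvSucc ps z = x)) →
    (∀ z, (pvScan ps f ord acc x).1.contains z = true →
      ((pvScan ps f ord acc x).1.contains (pvSucc ps z) = true
        ∨ pvSucc ps z = (pvScan ps f ord acc x).2.2)) := by
  intro f
  induction f with
  | zero => intro ord acc x h z hz; exact h z hz
  | succ g ih =>
    intro ord acc x h
    rw [pvScan]
    by_cases h1 : (ps.length : Int) ≤ x
    · rw [if_pos h1]; exact h
    rw [if_neg h1]
    by_cases h2 : ord.contains x = true
    · rw [if_pos h2]; exact h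
    rw [if_neg h2]
    rcases hget : PySem.List.pyGet? ps x with _ | ⟨op, v⟩
    · simp only [hget]; exact h
    · simp only [hget]
      refine ih (ord.insert x (ord.size : Int)) _ _ ?_
      intro z hz
      rw [PySem.Dict.contains_insert] at hz
      rcases (by simpa using hz : z = x ∨ ord.contains z = true) with rfl | hz'
      · right
        rw [pvSucc_some ps z op v hget]
      · rcases h z hz' with hc | hc
        · left; rw [PySem.Dict.contains_insert]; simp [hc]
        · left; rw [hc, PySem.Dict.contains_insert]; simp


theorem pvScan_good (ps : List (String × Int)) (hP : pvProgOK ps) :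
    ∀ (f : Nat) (ord : PySem.Dict Int Int) (acc x : Int),
    pvOrdGood ord ps.length → 0 ≤ x → pvOrdGood (pvScan ps f ord acc x).1 ps.length := by
  intro f
  induction f with
  | zero => intro ord acc x hg _; exact hg
  | succ g ih =>
    intro ord acc x hg hx
    rw [pvScan]
    by_cases h1 : (ps.length : Int) ≤ x
    · rw [if_pos h1]; exact hg
    rw [if_neg h1]
    by_cases h2 : ord.contains x = true
    · rw [if_pos h2]; exact hg
    rw [if_neg h2]
    rcases hget : PySem.List.pyGet? ps x with _ | ⟨op, v⟩
    · simp only [hget]; exact hg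
    · simp only [hget]
      exact ih _ _ _ (pvOrdGood_insert ord ps.length x hg (by simpa using h2) hx (by omega))
        (pvStep_nonneg ps hP x hx (by omega) op v hget)

-- decompose the scan at the first visit of a position it records
theorem pvScan_at (ps : List (String × Int)) (hP : pvProgOK ps) (w : Int) :
    ∀ (f : Nat) (ord : PySem.Dict Int Int) (acc x : Int), 0 ≤ x → pvOrdGood ord ps.length →
    (pvScan ps f ord acc x).1.contains w = true → ord.contains w = false →
    ∃ f2 ord2 acc2, pvScan ps f ord acc x = pvScan ps f2 ord2 acc2 w ∧
      ord2.contains w = false ∧ pvOrdGood ord2 ps.length ∧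
      f + pvCnt (fun y => ord.contains y) ps.length
        = f2 + pvCnt (fun y => ord2.contains y) ps.length := by
  intro f
  induction f with
  | zero => intro ord acc x _ _ hw hw'; exact absurd hw (by simp [pvScan, hw'])
  | succ g ih =>
    intro ord acc x hx hg hw hw'
    rw [pvScan] at hw ⊢
    by_cases h1 : (ps.length : Int) ≤ x
    · rw [if_pos h1] at hw; exact absurd hw (by simp [hw'])
    rw [if_neg h1] at hw ⊢
    by_cases h2 : ord.contains x = true
    · rw [if_pos h2] at hw; exact absurd hw (by simp [hw'])
    rw [if_neg h2] at hw ⊢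
    rcases hget : PySem.List.pyGet? ps x with _ | ⟨op, v⟩
    · rw [hget] at hw; exact absurd hw (by simp [hw'])
    rw [hget] at hw
    simp only [hget]
    by_cases hxw : x = w
    · subst hxw
      refine ⟨g + 1, ord, acc, ?_, hw', hg, rfl⟩
      rw [pvScan, if_neg h1, if_neg h2, hget]
    · have hw2 : (ord.insert x (ord.size : Int)).contains w = false := by
        rw [PySem.Dict.contains_insert, hw', Bool.or_false]
        exact beq_eq_false_iff_ne.mpr (fun h : w = x => hxw h.symm)
      obtain ⟨f2, ord2, acc2, heq, hc2, hg2, hcnt⟩ := ih (ord.insert x (ord.size : Int))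
        (if op = "acc" then acc + v else acc) (if op = "jmp" then x + v else x + 1)
        (pvStep_nonneg ps hP x hx (by omega) op v hget)
        (pvOrdGood_insert ord ps.length x hg (by simpa using h2) hx (by omega)) hw hw2
      refine ⟨f2, ord2, acc2, heq, hc2, hg2, ?_⟩
      have hbump : pvCnt (fun y => (ord.insert x (ord.size : Int)).contains y) ps.length
          = pvCnt (fun y => ord.contains y) ps.length + 1 := by
        refine pvCnt_update (fun y => ord.contains y) _ ps.length x hx (by omega) ?_ (by simpa using h2)
        intro k _
        rw [PySem.Dict.contains_insert]
      omega

-- at a decomposition point that the full scan records, its order value is the current size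
theorem pvScanAtVal (ps : List (String × Int)) (ordF : PySem.Dict Int Int) (accF xF : Int) :
    ∀ (f2 : Nat) (ord2 : PySem.Dict Int Int) (acc2 x : Int),
    pvScan ps f2 ord2 acc2 x = (ordF, accF, xF) →
    ord2.contains x = false → ordF.contains x = true → 0 ≤ x → x < (ps.length : Int) →
    ordF.getD x 0 = (ord2.size : Int) := by
  intro f2 ord2 acc2 x heq hfresh hmem hx hxn
  cases f2 with
  | zero =>
    have : ord2 = ordF := congrArg (·.1) heq
    rw [← this] at hmem
    rw [hfresh] at hmem
    exact absurd hmem (by simp)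
  | succ g =>
    rw [pvScan, if_neg (show ¬ (ps.length : Int) ≤ x by omega), if_neg (show ¬ ord2.contains x = true by simp [hfresh])] at heq
    rcases hget : PySem.List.pyGet? ps x with _ | ⟨op, v⟩
    · exact absurd (pvGetSome ps x hx hxn) (by simp [hget])
    rw [hget] at heq
    simp only at heq
    have hp := (pvScan_persist ps g (ord2.insert x (ord2.size : Int))
      (if op = "acc" then acc2 + v else acc2) (if op = "jmp" then x + v else x + 1) x
      (by rw [PySem.Dict.contains_insert]; simp))
    rw [heq] at hp
    simp only at hp
    rw [hp.2, PySem.Dict.getD_insert_self]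

-- once the swapped position is marked seen, the swap can never fire again
theorem pvFlipElim (ps : List (String × Int)) (i : Int) : ∀ (f : Nat) (seen : PySem.Set Int) (acc x : Int),
    PySem.Set.contains seen i = true →
    pvRunB ps i f seen acc x = pvRun ps f seen acc x := by
  intro f
  induction f with
  | zero => intro seen acc x _; rfl
  | succ g ih =>
    intro seen acc x hi
    rw [pvRunB, pvRun]
    by_cases h1 : PySem.Set.contains seen x = true
    · rw [if_pos h1, if_pos h1]
    rw [if_neg h1, if_neg h1]
    by_cases h2 : (ps.length : Int) ≤ x
    · rw [if_pos h2, if_pos h2]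
    rw [if_neg h2, if_neg h2]
    rcases hget : PySem.List.pyGet? ps x with _ | ⟨op, v⟩
    · simp only [hget]
    simp only [hget]
    have hxi : ¬(x = i) := by rintro rfl; exact h1 hi
    rw [if_neg hxi]
    have hadd : PySem.Set.contains (PySem.Set.add seen x) i = true := by
      rw [pvSetAddContains, hi, Bool.or_true]
    by_cases ha : op = "acc"
    · rw [if_pos ha, if_pos ha]; exact ih _ _ _ hadd
    rw [if_neg ha, if_neg ha]
    by_cases hj : op = "jmp"
    · rw [if_pos hj, if_pos hj]; exact ih _ _ _ hadd
    rw [if_neg hj, if_neg hj]; exact ih _ _ _ hadd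

-- the accumulator-only runner computes the accumulator of the swapped run
theorem pvAcc_eq (ps : List (String × Int)) (swap : Nat) : ∀ (f : Nat) (seen : PySem.Set Int) (acc x : Int),
    pvAcc ps swap f seen acc x = (pvRunB ps (swap : Int) f seen acc x).2 := by
  intro f
  induction f with
  | zero => intro seen acc x; rfl
  | succ g ih =>
    intro seen acc x
    rw [pvAcc, pvRunB]
    by_cases h2 : (ps.length : Int) ≤ x
    · by_cases h1 : PySem.Set.contains seen x = true
      · simp only [if_pos h2, if_pos h1]
      · simp only [if_pos h2, if_neg h1]
    · by_cases h1 : PySem.Set.contains seen x = true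
      · simp only [if_neg h2, if_pos h1]
      · simp only [if_neg h2, if_neg h1]
        rcases hget : PySem.List.pyGet? ps x with _ | ⟨op0, v⟩
        · simp only [hget]
        simp only [hget]
        by_cases hsw : x = (swap : Int)
        · simp only [if_pos hsw]
          by_cases ha : (if op0 = "nop" then "jmp" else "nop") = "acc"
          · simp only [if_pos ha]; exact ih _ _ _
          simp only [if_neg ha]
          by_cases hj : (if op0 = "nop" then "jmp" else "nop") = "jmp"
          · simp only [if_pos hj]; exact ih _ _ _
          · simp only [if_neg hj]; exact ih _ _ _
        · simp only [if_neg hsw]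
          by_cases ha : op0 = "acc"
          · simp only [if_pos ha]; exact ih _ _ _
          simp only [if_neg ha]
          by_cases hj : op0 = "jmp"
          · simp only [if_pos hj]; exact ih _ _ _
          · simp only [if_neg hj]; exact ih _ _ _

-- a run started inside a successor-closed set of in-range positions can never exit
theorem pvRunNoOk (ps : List (String × Int)) (ordF : PySem.Dict Int Int)
    (hbound : ∀ y, ordF.contains y = true → 0 ≤ y ∧ y < (ps.length : Int))
    (hclosed : ∀ z, ordF.contains z = true → ordF.contains (pvSucc ps z) = true) :
    ∀ (f : Nat) (seen : PySem.Set Int) (acc x : Int), ordF.contains x = true →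
    (pvRun ps f seen acc x).1 ≠ "ok" := by
  intro f
  induction f with
  | zero => intro seen acc x _; simp [pvRun]
  | succ g ih =>
    intro seen acc x hx
    rw [pvRun]
    by_cases h1 : PySem.Set.contains seen x = true
    · rw [if_pos h1]; simp
    rw [if_neg h1]
    by_cases h2 : (ps.length : Int) ≤ x
    · exact absurd (hbound x hx).2 (by omega)
    rw [if_neg h2]
    rcases hget : PySem.List.pyGet? ps x with _ | ⟨op, v⟩
    · simp only [hget]; simp
    simp only [hget]
    have hnext : ordF.contains (if op = "jmp" then x + v else x + 1) = true := by
      rw [← pvSucc_some ps x op v hget]; exact hclosed x hx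
    by_cases ha : op = "acc"
    · rw [if_pos ha]
      refine ih _ _ _ ?_
      rw [ha] at hnext
      simpa using hnext
    rw [if_neg ha]
    by_cases hj : op = "jmp"
    · rw [if_pos hj]
      refine ih _ _ _ ?_
      rw [hj] at hnext
      simpa using hnext
    rw [if_neg hj]
    refine ih _ _ _ ?_
    rw [if_neg hj] at hnext
    exact hnext


-- decompose A's swapped run and the scan together at the first visit of the swap position
theorem pvSpine (ps : List (String × Int)) (hP : pvProgOK ps) (i : Int) :
    ∀ (f : Nat) (ord : PySem.Dict Int Int) (seen : PySem.Set Int) (acc x : Int), 0 ≤ x →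
    (∀ y, ord.contains y = PySem.Set.contains seen y) →
    pvOrdGood ord ps.length →
    (pvScan ps f ord acc x).1.contains i = true → ord.contains i = false →
    ∃ (f2 : Nat) (ord2 : PySem.Dict Int Int) (seen2 : PySem.Set Int) (acc2 : Int),
      pvScan ps f ord acc x = pvScan ps f2 ord2 acc2 i ∧
      pvRunB ps i f seen acc x = pvRunB ps i f2 seen2 acc2 i ∧
      (∀ y, ord2.contains y = PySem.Set.contains seen2 y) ∧
      ord2.contains i = false ∧ pvOrdGood ord2 ps.length ∧
      f + pvCnt (fun y => ord.contains y) ps.length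
        = f2 + pvCnt (fun y => ord2.contains y) ps.length := by
  intro f
  induction f with
  | zero => intro ord seen acc x _ _ _ hi hi'; exact absurd hi (by simp [pvScan, hi'])
  | succ g ih =>
    intro ord seen acc x hx heqv hg hi hi'
    by_cases hxi : x = i
    · subst hxi; exact ⟨g + 1, ord, seen, acc, rfl, rfl, heqv, hi', hg, rfl⟩
    rw [pvScan] at hi
    by_cases h1 : (ps.length : Int) ≤ x
    · rw [if_pos h1] at hi; exact absurd hi (by simp [hi'])
    rw [if_neg h1] at hi
    by_cases h2 : ord.contains x = true
    · rw [if_pos h2] at hi; exact absurd hi (by simp [hi'])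
    rw [if_neg h2] at hi
    rcases hget : PySem.List.pyGet? ps x with _ | ⟨op, v⟩
    · rw [hget] at hi; exact absurd hi (by simp [hi'])
    rw [hget] at hi
    simp only at hi
    have hi2' : (ord.insert x (ord.size : Int)).contains i = false := by
      rw [PySem.Dict.contains_insert, hi', Bool.or_false]
      exact beq_eq_false_iff_ne.mpr (fun h : i = x => hxi h.symm)
    have heqv' : ∀ y, (ord.insert x (ord.size : Int)).contains y
        = PySem.Set.contains (PySem.Set.add seen x) y := by
      intro y; rw [PySem.Dict.contains_insert, pvSetAddContains, heqv y]
    have hg' := pvOrdGood_insert ord ps.length x hg (by simpa using h2) hx (by omega)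
    have hx' := pvStep_nonneg ps hP x hx (by omega) op v hget
    obtain ⟨f2, ord2, seen2, acc2, hEs, hEr, hq, hc, hgg, hcnt⟩ :=
      ih (ord.insert x (ord.size : Int)) (PySem.Set.add seen x)
        (if op = "acc" then acc + v else acc) (if op = "jmp" then x + v else x + 1) hx' heqv' hg' hi hi2'
    refine ⟨f2, ord2, seen2, acc2, ?_, ?_, hq, hc, hgg, ?_⟩
    · rw [pvScan, if_neg h1, if_neg h2, hget]
      exact hEs
    · rw [pvRunB]
      have hs1 : PySem.Set.contains seen x = false := by rw [← heqv x]; simpa using h2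
      rw [if_neg (by rw [hs1]; simp), if_neg h1]
      simp only [hget]
      rw [if_neg hxi]
      have hsel : (if op = "acc" then pvRunB ps i g (PySem.Set.add seen x) (acc + v) (x + 1)
          else if op = "jmp" then pvRunB ps i g (PySem.Set.add seen x) acc (x + v)
          else pvRunB ps i g (PySem.Set.add seen x) acc (x + 1))
          = pvRunB ps i g (PySem.Set.add seen x) (if op = "acc" then acc + v else acc)
              (if op = "jmp" then x + v else x + 1) := by
        by_cases ha : op = "acc"
        · subst ha; simp
        · by_cases hj : op = "jmp"
          · subst hj; simp
          · simp [ha, hj]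
      rw [hsel]
      exact hEr
    · have hbump : pvCnt (fun y => (ord.insert x (ord.size : Int)).contains y) ps.length
          = pvCnt (fun y => ord.contains y) ps.length + 1 := by
        refine pvCnt_update (fun y => ord.contains y) _ ps.length x hx (by omega) ?_ (by simpa using h2)
        intro k _
        rw [PySem.Dict.contains_insert]
      omega

-- a swap at a position the original run never reaches leaves the run unchanged
theorem pvC1 (ps : List (String × Int)) (hP : pvProgOK ps) (m : Int) :
    ∀ (f : Nat) (ord : PySem.Dict Int Int) (seen : PySem.Set Int) (acc x : Int), 0 ≤ x →
    (∀ y, ord.contains y = PySem.Set.contains seen y) →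
    pvOrdGood ord ps.length →
    ps.length < f + pvCnt (fun y => ord.contains y) ps.length →
    (pvScan ps f ord acc x).1.contains m = false →
    pvRunB ps m f seen acc x
      = (if (ps.length : Int) ≤ (pvScan ps f ord acc x).2.2 then "ok" else "error",
         (pvScan ps f ord acc x).2.1) := by
  intro f
  induction f with
  | zero =>
    intro ord seen acc x _ _ _ hcnt _
    have := pvCnt_le (fun y => ord.contains y) ps.length
    omega
  | succ g ih =>
    intro ord seen acc x hx heqv hg hcnt hm
    rw [pvScan] at hm ⊢
    rw [pvRunB]
    by_cases h1 : (ps.length : Int) ≤ x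
    · have hs1 : PySem.Set.contains seen x = false := by
        rw [← heqv x]
        cases hc : ord.contains x
        · rfl
        · exact absurd ((hg.1 x hc).1.2) (by omega)
      rw [if_neg (by rw [hs1]; simp)]
      simp only [if_pos h1]
    · rw [if_neg h1] at hm ⊢
      by_cases h2 : ord.contains x = true
      · rw [if_pos h2] at hm ⊢
        rw [if_pos (show PySem.Set.contains seen x = true by rw [← heqv x]; exact h2)]
        have hxn : x < (ps.length : Int) := (hg.1 x h2).1.2
        simp only [if_neg (show ¬ (ps.length : Int) ≤ x by omega)]
      · rw [if_neg h2] at hm ⊢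
        have hs1 : PySem.Set.contains seen x = false := by rw [← heqv x]; simpa using h2
        rw [if_neg (by rw [hs1]; simp)]
        rcases hget : PySem.List.pyGet? ps x with _ | ⟨op, v⟩
        · exact absurd (pvGetSome ps x hx (by omega)) (by simp [hget])
        simp only [hget] at hm ⊢
        have hxm : ¬ (x = m) := by
          rintro rfl
          have := (pvScan_persist ps g (ord.insert x (ord.size : Int))
            (if op = "acc" then acc + v else acc) (if op = "jmp" then x + v else x + 1) x
            (by rw [PySem.Dict.contains_insert]; simp)).1
          rw [hm] at this
          exact absurd this (by simp)
        rw [if_neg hxm]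
        have heqv' : ∀ y, (ord.insert x (ord.size : Int)).contains y
            = PySem.Set.contains (PySem.Set.add seen x) y := by
          intro y; rw [PySem.Dict.contains_insert, pvSetAddContains, heqv y]
        have hg' := pvOrdGood_insert ord ps.length x hg (by simpa using h2) hx (by omega)
        have hx' := pvStep_nonneg ps hP x hx (by omega) op v hget
        have hbump : pvCnt (fun y => (ord.insert x (ord.size : Int)).contains y) ps.length
            = pvCnt (fun y => ord.contains y) ps.length + 1 := by
          refine pvCnt_update (fun y => ord.contains y) _ ps.length x hx (by omega) ?_ (by simpa using h2)
          intro k _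
          rw [PySem.Dict.contains_insert]
        have hsel : (if op = "acc" then pvRunB ps m g (PySem.Set.add seen x) (acc + v) (x + 1)
            else if op = "jmp" then pvRunB ps m g (PySem.Set.add seen x) acc (x + v)
            else pvRunB ps m g (PySem.Set.add seen x) acc (x + 1))
            = pvRunB ps m g (PySem.Set.add seen x) (if op = "acc" then acc + v else acc)
                (if op = "jmp" then x + v else x + 1) := by
          by_cases ha : op = "acc"
          · subst ha; simp
          · by_cases hj : op = "jmp"
            · subst hj; simp
            · simp [ha, hj]
        rw [hsel]
        have hred : (if (ps.length : Int) ≤ x then (ord, acc, x)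
            else pvScan ps g (ord.insert x (ord.size : Int)) (if op = "acc" then acc + v else acc)
              (if op = "jmp" then x + v else x + 1))
            = pvScan ps g (ord.insert x (ord.size : Int)) (if op = "acc" then acc + v else acc)
              (if op = "jmp" then x + v else x + 1) := if_neg h1
        rw [hred]
        exact ih (ord.insert x (ord.size : Int)) (PySem.Set.add seen x)
          (if op = "acc" then acc + v else acc) (if op = "jmp" then x + v else x + 1)
          hx' heqv' hg' (by omega) hm


theorem pvSetEmptyContains (y : Int) : PySem.Set.contains PySem.Set.empty y = false := by
  cases h : PySem.Set.contains PySem.Set.empty y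
  · rfl
  · have := (PySem.Set.contains_iff _ _).mp h
    rw [PySem.Set.empty] at this
    exact absurd this (by simp)

theorem pvCnt_zero (p : Int → Bool) (n : Nat) (h : ∀ y : Int, p y = false) : pvCnt p n = 0 := by
  unfold pvCnt
  refine List.countP_eq_zero.mpr ?_
  intro a _
  rw [h]
  simp

-- when the original run exits, a suffix run resumed at a scanned position also exits
theorem pvTailRun (ps : List (String × Int)) (hP : pvProgOK ps)
    (ordF : PySem.Dict Int Int) (accF xF : Int) (t : Int)
    (hgoodF : pvOrdGood ordF ps.length)
    (hxF : (ps.length : Int) ≤ xF)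
    (wseen0 : PySem.Set Int)
    (hws : ∀ y, PySem.Set.contains wseen0 y = true → ordF.contains y = false ∧ y < (ps.length : Int)) :
    ∀ (f2 : Nat) (ord2 : PySem.Dict Int Int) (acc2 : Int) (f : Nat) (seen : PySem.Set Int)
      (acc x s : Int),
      pvScan ps f2 ord2 acc2 x = (ordF, accF, xF) →
      pvOrdGood ord2 ps.length →
      (∀ y, PySem.Set.contains seen y = true ↔
        ((ordF.contains y = true ∧ (ordF.getD y 0 ≤ t
            ∨ (s ≤ ordF.getD y 0 ∧ ordF.getD y 0 < (ord2.size : Int))))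
          ∨ PySem.Set.contains wseen0 y = true)) →
      t < s → s ≤ (ord2.size : Int) →
      ps.length < f + pvCnt (fun y => PySem.Set.contains seen y) ps.length →
      0 ≤ x →
      (pvRun ps f seen acc x).1 = "ok" := by
  intro f2
  induction f2 with
  | zero =>
    intro ord2 acc2 f seen acc x s heq _ hchar _ _ hcnt _
    have hxeq : x = xF := congrArg (fun p => p.2.2) heq
    have hf1 : 1 ≤ f := by
      have := pvCnt_le (fun y => PySem.Set.contains seen y) ps.length
      omega
    obtain ⟨f', rfl⟩ : ∃ f', f = f' + 1 := ⟨f - 1, by omega⟩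
    rw [pvRun]
    have hxs : PySem.Set.contains seen x = false := by
      cases hc : PySem.Set.contains seen x
      · rfl
      · rcases (hchar x).mp hc with ⟨hcF, _⟩ | hw
        · exact absurd ((hgoodF.1 x hcF).1.2) (by omega)
        · exact absurd (hws x hw).2 (by omega)
    rw [if_neg (by rw [hxs]; simp), if_pos (by omega : (ps.length : Int) ≤ x)]
  | succ g ih =>
    intro ord2 acc2 f seen acc x s heq hg2 hchar hts hssz hcnt hx
    rw [pvScan] at heq
    by_cases h1 : (ps.length : Int) ≤ x
    · have hf1 : 1 ≤ f := by
        have := pvCnt_le (fun y => PySem.Set.contains seen y) ps.length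
        omega
      obtain ⟨f', rfl⟩ : ∃ f', f = f' + 1 := ⟨f - 1, by omega⟩
      rw [pvRun]
      have hxs : PySem.Set.contains seen x = false := by
        cases hc : PySem.Set.contains seen x
        · rfl
        · rcases (hchar x).mp hc with ⟨hcF, _⟩ | hw
          · exact absurd ((hgoodF.1 x hcF).1.2) (by omega)
          · exact absurd (hws x hw).2 (by omega)
      rw [if_neg (by rw [hxs]; simp), if_pos h1]
    rw [if_neg h1] at heq
    by_cases h2 : ord2.contains x = true
    · rw [if_pos h2] at heq
      have hxeq : x = xF := congrArg (fun p => p.2.2) heq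
      omega
    rw [if_neg h2] at heq
    rcases hget : PySem.List.pyGet? ps x with _ | ⟨op, v⟩
    · exact absurd (pvGetSome ps x hx (by omega)) (by simp [hget])
    rw [hget] at heq
    simp only at heq
    have hpx := pvScan_persist ps g (ord2.insert x (ord2.size : Int))
      (if op = "acc" then acc2 + v else acc2) (if op = "jmp" then x + v else x + 1) x
      (by rw [PySem.Dict.contains_insert]; simp)
    rw [heq] at hpx
    simp only at hpx
    have hxF' : ordF.contains x = true := hpx.1
    have hxval : ordF.getD x 0 = (ord2.size : Int) := by
      rw [hpx.2, PySem.Dict.getD_insert_self]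
    have hxs : PySem.Set.contains seen x = false := by
      cases hc : PySem.Set.contains seen x
      · rfl
      · rcases (hchar x).mp hc with ⟨_, hle | ⟨_, hlt⟩⟩ | hw
        · rw [hxval] at hle; omega
        · rw [hxval] at hlt; omega
        · exact absurd hxF' (by simp [(hws x hw).1])
    have hf1 : 1 ≤ f := by
      have := pvCnt_le (fun y => PySem.Set.contains seen y) ps.length
      omega
    obtain ⟨f', rfl⟩ : ∃ f', f = f' + 1 := ⟨f - 1, by omega⟩
    rw [pvRun]
    rw [if_neg (by rw [hxs]; simp), if_neg h1]
    simp only [hget]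
    have hsel : (if op = "acc" then pvRun ps f' (PySem.Set.add seen x) (acc + v) (x + 1)
        else if op = "jmp" then pvRun ps f' (PySem.Set.add seen x) acc (x + v)
        else pvRun ps f' (PySem.Set.add seen x) acc (x + 1))
        = pvRun ps f' (PySem.Set.add seen x) (if op = "acc" then acc + v else acc)
            (if op = "jmp" then x + v else x + 1) := by
      by_cases ha : op = "acc"
      · subst ha; simp
      · by_cases hj : op = "jmp"
        · subst hj; simp
        · simp [ha, hj]
    rw [hsel]
    have hsz : ((ord2.insert x (ord2.size : Int)).size : Int) = (ord2.size : Int) + 1 := by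
      rw [PySem.Dict.size_insert, if_neg (by simp [h2])]
      push_cast
      ring
    refine ih (ord2.insert x (ord2.size : Int))
      (if op = "acc" then acc2 + v else acc2) f' (PySem.Set.add seen x) _
      (if op = "jmp" then x + v else x + 1) s heq
      (pvOrdGood_insert ord2 ps.length x hg2 (by simpa using h2) hx (by omega)) ?_ hts ?_ ?_
      (pvStep_nonneg ps hP x hx (by omega) op v hget)
    · intro y
      rw [pvSetAddContains, hsz]
      by_cases hyx : y = x
      · subst hyx
        simp only [BEq.rfl, Bool.true_or]
        constructor
        · intro _
          exact Or.inl ⟨hxF', Or.inr ⟨by omega, by omega⟩⟩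
        · intro _; trivial
      · rw [beq_eq_false_iff_ne.mpr hyx, Bool.false_or]
        rw [hchar y]
        constructor
        · rintro (⟨hcy, hle | ⟨hge, hlt⟩⟩ | hw)
          · exact Or.inl ⟨hcy, Or.inl hle⟩
          · exact Or.inl ⟨hcy, Or.inr ⟨hge, by omega⟩⟩
          · exact Or.inr hw
        · rintro (⟨hcy, hle | ⟨hge, hlt⟩⟩ | hw)
          · exact Or.inl ⟨hcy, Or.inl hle⟩
          · refine Or.inl ⟨hcy, Or.inr ⟨hge, ?_⟩⟩
            have hne : ordF.getD y 0 ≠ (ord2.size : Int) := by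
              intro hcontra
              exact hyx (hgoodF.2 y x hcy hxF' (by rw [hcontra, hxval]))
            omega
          · exact Or.inr hw
    · omega
    · have hbump : pvCnt (fun y => PySem.Set.contains (PySem.Set.add seen x) y) ps.length
          = pvCnt (fun y => PySem.Set.contains seen y) ps.length + 1 := by
        refine pvCnt_update (fun y => PySem.Set.contains seen y) _ ps.length x hx (by omega) ?_ hxs
        intro k _
        rw [pvSetAddContains]
      omega


-- the flip-free walk decides whether a suffix run exits
theorem pvWalkRun (ps : List (String × Int)) (hP : pvProgOK ps)
    (ordF : PySem.Dict Int Int) (accF xF : Int)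
    (hscan0 : pvScan ps (ps.length + 1) PySem.Dict.empty 0 0 = (ordF, accF, xF))
    (hgoodF : pvOrdGood ordF ps.length) (t : Int) :
    ∀ (g f : Nat) (wseen seen : PySem.Set Int) (acc x : Int),
      (∀ y, PySem.Set.contains wseen y = true →
        ordF.contains y = false ∧ 0 ≤ y ∧ y < (ps.length : Int)) →
      (∀ y, PySem.Set.contains seen y = true ↔
        ((ordF.contains y = true ∧ ordF.getD y 0 ≤ t) ∨ PySem.Set.contains wseen y = true)) →
      ps.length < f + pvCnt (fun y => PySem.Set.contains seen y) ps.length →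
      f ≤ g → 0 ≤ x →
      ((pvRun ps f seen acc x).1 = "ok" ↔
        ((pvWalk ps ordF (decide ((ps.length : Int) ≤ xF)) g wseen x).1
          && (match (pvWalk ps ordF (decide ((ps.length : Int) ≤ xF)) g wseen x).2 with
              | none => true
              | some m => decide (t < ordF.getD m 0))) = true) := by
  intro g
  induction g with
  | zero =>
    intro f wseen seen acc x _ _ hcnt hfg _
    have := pvCnt_le (fun y => PySem.Set.contains seen y) ps.length
    omega
  | succ g ih =>
    intro f wseen seen acc x hws hchar hcnt hfg hx
    have hf1 : 1 ≤ f := by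
      have := pvCnt_le (fun y => PySem.Set.contains seen y) ps.length
      omega
    obtain ⟨f', rfl⟩ : ∃ f', f = f' + 1 := ⟨f - 1, by omega⟩
    rw [pvWalk, pvRun]
    by_cases h1 : (ps.length : Int) ≤ x
    · have hxs : PySem.Set.contains seen x = false := by
        cases hc : PySem.Set.contains seen x
        · rfl
        · rcases (hchar x).mp hc with ⟨hcF, _⟩ | hw
          · exact absurd ((hgoodF.1 x hcF).1.2) (by omega)
          · exact absurd (hws x hw).2.2 (by omega)
      rw [if_neg (by rw [hxs]; simp)]
      simp only [if_pos h1]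
      simp
    simp only [if_neg h1]
    by_cases h2 : ordF.contains x = true
    · rw [if_pos h2]
      by_cases hts : t < ordF.getD x 0
      · have hxs : PySem.Set.contains seen x = false := by
          cases hc : PySem.Set.contains seen x
          · rfl
          · rcases (hchar x).mp hc with ⟨_, hle⟩ | hw
            · omega
            · exact absurd h2 (by simp [(hws x hw).1])
        rw [if_neg (by rw [hxs]; simp)]
        by_cases hok : (ps.length : Int) ≤ xF
        · have hscan0' : (pvScan ps (ps.length + 1) PySem.Dict.empty 0 0).1.contains x = true := by
            rw [hscan0]; exact h2
          obtain ⟨f2, ord2, acc2, heq2, hfr2, hg2, hcnt2⟩ :=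
            pvScan_at ps hP x (ps.length + 1) PySem.Dict.empty 0 0 (le_refl 0)
              (pvOrdGood_empty ps.length) hscan0' (PySem.Dict.contains_empty x)
          rw [hscan0] at heq2
          have hval := pvScanAtVal ps ordF accF xF f2 ord2 acc2 x heq2.symm hfr2 h2 hx (by omega)
          have hchar2 : ∀ y, PySem.Set.contains seen y = true ↔
              ((ordF.contains y = true ∧ (ordF.getD y 0 ≤ t
                  ∨ (ordF.getD x 0 ≤ ordF.getD y 0 ∧ ordF.getD y 0 < (ord2.size : Int))))
                ∨ PySem.Set.contains wseen y = true) := by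
            intro y
            rw [hchar y]
            constructor
            · rintro (⟨hcy, hle⟩ | hw)
              · exact Or.inl ⟨hcy, Or.inl hle⟩
              · exact Or.inr hw
            · rintro (⟨hcy, hle | ⟨hge, hlt⟩⟩ | hw)
              · exact Or.inl ⟨hcy, hle⟩
              · rw [hval] at hge; omega
              · exact Or.inr hw
          have hrun := pvTailRun ps hP ordF accF xF t hgoodF hok wseen
            (fun y hy => ⟨(hws y hy).1, (hws y hy).2.2⟩)
            f2 ord2 acc2 (f' + 1) seen acc x (ordF.getD x 0) heq2.symm hg2 hchar2 hts
            (by rw [hval]) hcnt hx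
          rw [pvRun, if_neg (by rw [hxs]; simp), if_neg h1] at hrun
          simp [hrun, hok, hts]
        · have hclosed0 := pvScan_closed ps (ps.length + 1) PySem.Dict.empty 0 0
            (fun z hz => absurd hz (by simp [PySem.Dict.contains_empty]))
          have hterm := pvScan_term ps hP (ps.length + 1) PySem.Dict.empty 0 0 (le_refl 0)
            (by rw [pvCnt_zero _ _ (fun y => PySem.Dict.contains_empty y)]; omega)
          rw [hscan0] at hclosed0 hterm
          simp only at hclosed0 hterm
          have hxFm : ordF.contains xF = true := by
            rcases hterm with h | h
            · exact absurd h hok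
            · exact h
          have hclosed : ∀ z, ordF.contains z = true → ordF.contains (pvSucc ps z) = true := by
            intro z hz
            rcases hclosed0 z hz with h | h
            · exact h
            · rw [h]; exact hxFm
          have hnok := pvRunNoOk ps ordF (fun y hy => (hgoodF.1 y hy).1) hclosed
            (f' + 1) seen acc x h2
          rw [pvRun, if_neg (by rw [hxs]; simp), if_neg h1] at hnok
          simp [hnok, hok]
      · have hxs : PySem.Set.contains seen x = true :=
          (hchar x).mpr (Or.inl ⟨h2, by omega⟩)
        rw [if_pos hxs]
        simp [hts]
    rw [if_neg h2]
    by_cases h3 : PySem.Set.contains wseen x = true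
    · rw [if_pos h3]
      have hxs : PySem.Set.contains seen x = true := (hchar x).mpr (Or.inr h3)
      rw [if_pos hxs]
      simp
    · rw [if_neg h3]
      have hxs : PySem.Set.contains seen x = false := by
        cases hc : PySem.Set.contains seen x
        · rfl
        · rcases (hchar x).mp hc with ⟨hcF, _⟩ | hw
          · exact absurd hcF h2
          · exact absurd hw h3
      rw [if_neg (by rw [hxs]; simp)]
      rcases hget : PySem.List.pyGet? ps x with _ | ⟨op, v⟩
      · exact absurd (pvGetSome ps x hx (by omega)) (by simp [hget])
      simp only [hget]
      rw [pvSucc_some ps x op v hget]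
      have hsel : (if op = "acc" then pvRun ps f' (PySem.Set.add seen x) (acc + v) (x + 1)
          else if op = "jmp" then pvRun ps f' (PySem.Set.add seen x) acc (x + v)
          else pvRun ps f' (PySem.Set.add seen x) acc (x + 1))
          = pvRun ps f' (PySem.Set.add seen x) (if op = "acc" then acc + v else acc)
              (if op = "jmp" then x + v else x + 1) := by
        by_cases ha : op = "acc"
        · subst ha; simp
        · by_cases hj : op = "jmp"
          · subst hj; simp
          · simp [ha, hj]
      rw [hsel]
      refine ih f' (PySem.Set.add wseen x) (PySem.Set.add seen x) _ _ ?_ ?_ ?_ (by omega)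
        (pvStep_nonneg ps hP x hx (by omega) op v hget)
      · intro y hy
        rw [pvSetAddContains] at hy
        rcases (by simpa using hy : y = x ∨ PySem.Set.contains wseen y = true) with heq | hw
        · subst heq
          exact ⟨by simpa using h2, hx, by omega⟩
        · exact hws y hw
      · intro y
        rw [pvSetAddContains, pvSetAddContains]
        by_cases hyx : y = x
        · subst hyx
          simp
        · rw [beq_eq_false_iff_ne.mpr hyx]
          simp only [Bool.false_or]
          exact hchar y
      · have hbump : pvCnt (fun y => PySem.Set.contains (PySem.Set.add seen x) y) ps.length
            = pvCnt (fun y => PySem.Set.contains seen y) ps.length + 1 := by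
          refine pvCnt_update (fun y => PySem.Set.contains seen y) _ ps.length x hx (by omega) ?_ hxs
          intro k _
          rw [pvSetAddContains]
        omega


-- the equivalence for one candidate the original run visits
theorem pvCandVisited (ps : List (String × Int)) (hP : pvProgOK ps)
    (ordF : PySem.Dict Int Int) (accF xF : Int)
    (hscan0 : pvScan ps (ps.length + 1) PySem.Dict.empty 0 0 = (ordF, accF, xF))
    (hgoodF : pvOrdGood ordF ps.length)
    (m : Nat) (hm : m < ps.length) (op : String) (v : Int)
    (hopv : ps.getD m ("", 0) = (op, v)) (hop : op = "nop" ∨ op = "jmp")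
    (hmem : ordF.contains (m : Int) = true) :
    ((pvRunB ps (m : Int) (ps.length + 1) PySem.Set.empty 0 0).1 = "ok" ↔
      ((pvWalk ps ordF (decide ((ps.length : Int) ≤ xF)) (ps.length + 1) PySem.Set.empty
          (if op = "nop" then (m : Int) + v else (m : Int) + 1)).1
        && (match (pvWalk ps ordF (decide ((ps.length : Int) ≤ xF)) (ps.length + 1) PySem.Set.empty
              (if op = "nop" then (m : Int) + v else (m : Int) + 1)).2 with
            | none => true
            | some mm => decide (ordF.getD (m : Int) 0 < ordF.getD mm 0))) = true) := by
  have hEQ0 : ∀ y : Int, (PySem.Dict.empty : PySem.Dict Int Int).contains y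
      = PySem.Set.contains PySem.Set.empty y := by
    intro y; rw [PySem.Dict.contains_empty, pvSetEmptyContains]
  have hcnt0 : pvCnt (fun y => (PySem.Dict.empty : PySem.Dict Int Int).contains y) ps.length = 0 :=
    pvCnt_zero _ _ (fun y => PySem.Dict.contains_empty y)
  obtain ⟨f2, ord2, seen2, acc2, hEs, hEr, hq, hfr, hg2, hcnt⟩ :=
    pvSpine ps hP (m : Int) (ps.length + 1) PySem.Dict.empty PySem.Set.empty 0 0 (le_refl 0)
      hEQ0 (pvOrdGood_empty ps.length) (by rw [hscan0]; exact hmem) (PySem.Dict.contains_empty _)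
  rw [hscan0] at hEs
  cases f2 with
  | zero =>
    have : ord2 = ordF := (congrArg (fun p => p.1) hEs).symm
    rw [this] at hfr
    rw [hfr] at hmem
    exact absurd hmem (by simp)
  | succ g =>
    have hmn : ¬ (ps.length : Int) ≤ (m : Int) := by exact_mod_cast not_le.mpr hm
    have hget : PySem.List.pyGet? ps (m : Int) = some (op, v) := by
      rw [pvGetSome ps (m : Int) (by positivity) (by exact_mod_cast hm)]
      rw [show ((m : Int)).toNat = m from by simp, hopv]
    rw [pvScan, if_neg hmn, if_neg (show ¬ ord2.contains (m : Int) = true by simp [hfr])] at hEs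
    rw [hget] at hEs
    simp only at hEs
    have hacc2 : (if op = "acc" then acc2 + v else acc2) = acc2 := by
      rcases hop with rfl | rfl <;> simp
    rw [hacc2] at hEs
    -- the visit order of the candidate
    have hpx := pvScan_persist ps g (ord2.insert (m : Int) (ord2.size : Int)) acc2
      (if op = "jmp" then (m : Int) + v else (m : Int) + 1) (m : Int)
      (by rw [PySem.Dict.contains_insert]; simp)
    rw [← hEs] at hpx
    simp only at hpx
    have htval : ordF.getD (m : Int) 0 = (ord2.size : Int) := by
      rw [hpx.2, PySem.Dict.getD_insert_self]
    -- unfold the swapped run one step at the candidate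
    have hs2 : PySem.Set.contains seen2 (m : Int) = false := by rw [← hq]; exact hfr
    rw [hEr, pvRunB, if_neg (by rw [hs2]; simp), if_neg hmn]
    simp only [hget]
    simp only [if_true]
    have hstep : (if (if op = "nop" then "jmp" else "nop") = "acc" then
          pvRunB ps (m : Int) g (PySem.Set.add seen2 (m : Int)) (acc2 + v) ((m : Int) + 1)
        else if (if op = "nop" then "jmp" else "nop") = "jmp" then
          pvRunB ps (m : Int) g (PySem.Set.add seen2 (m : Int)) acc2 ((m : Int) + v)
        else pvRunB ps (m : Int) g (PySem.Set.add seen2 (m : Int)) acc2 ((m : Int) + 1))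
        = pvRunB ps (m : Int) g (PySem.Set.add seen2 (m : Int)) acc2
            (if op = "nop" then (m : Int) + v else (m : Int) + 1) := by
      rcases hop with rfl | rfl <;> simp
    rw [hstep]
    rw [pvFlipElim ps (m : Int) g (PySem.Set.add seen2 (m : Int)) acc2 _
      (by rw [pvSetAddContains]; simp)]
    -- apply the walk correspondence
    refine pvWalkRun ps hP ordF accF xF hscan0 hgoodF (ordF.getD (m : Int) 0)
      (ps.length + 1) g PySem.Set.empty (PySem.Set.add seen2 (m : Int)) acc2 _ ?_ ?_ ?_ ?_ ?_
    · intro y hy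
      rw [pvSetEmptyContains] at hy
      exact absurd hy (by simp)
    · intro y
      rw [pvSetAddContains, pvSetEmptyContains]
      by_cases hyx : y = (m : Int)
      · subst hyx
        constructor
        · intro _
          exact Or.inl ⟨hmem, le_refl _⟩
        · intro _
          simp
      · rw [beq_eq_false_iff_ne.mpr hyx, Bool.false_or]
        constructor
        · intro hy
          have hy' : ord2.contains y = true := by rw [hq]; exact hy
          have hper := pvScan_persist ps (g + 1) ord2 acc2 (m : Int) y hy'
          rw [pvScan, if_neg hmn, if_neg (show ¬ ord2.contains (m : Int) = true by simp [hfr]), hget] at hper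
          simp only [hacc2] at hper
          rw [← hEs] at hper
          simp only at hper
          refine Or.inl ⟨hper.1, ?_⟩
          rw [hper.2, htval]
          exact le_of_lt (hg2.1 y hy').2.2
        · rintro (⟨hcy, hley⟩ | hfalse)
          · have hnew := pvScan_new ps g (ord2.insert (m : Int) (ord2.size : Int)) acc2
              (if op = "jmp" then (m : Int) + v else (m : Int) + 1) y
            rw [← hEs] at hnew
            simp only at hnew
            rcases hnew hcy with hc | hle
            · rw [PySem.Dict.contains_insert] at hc
              rcases (by simpa using hc : y = (m : Int) ∨ ord2.contains y = true) with heq | hc'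
              · exact absurd heq hyx
              · rw [← hq]; exact hc'
            · have hsz : ((ord2.insert (m : Int) (ord2.size : Int)).size : Int)
                  = (ord2.size : Int) + 1 := by
                rw [PySem.Dict.size_insert, if_neg (by simp [hfr])]
                push_cast
                ring
              rw [hsz] at hle
              rw [htval] at hley
              omega
          · exact absurd hfalse (by simp)
    · have hcnt2 : pvCnt (fun y => PySem.Set.contains seen2 y) ps.length
          = pvCnt (fun y => ord2.contains y) ps.length :=
        pvCnt_congr _ _ ps.length (fun y => (hq y).symm)
      have hbump : pvCnt (fun y => PySem.Set.contains (PySem.Set.add seen2 (m : Int)) y) ps.length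
          = pvCnt (fun y => PySem.Set.contains seen2 y) ps.length + 1 := by
        refine pvCnt_update (fun y => PySem.Set.contains seen2 y) _ ps.length (m : Int)
          (by positivity) (by exact_mod_cast hm) ?_ hs2
        intro k _
        rw [pvSetAddContains]
      rw [hcnt0] at hcnt
      omega
    · have := pvCnt_le (fun y => ord2.contains y) ps.length
      rw [hcnt0] at hcnt
      omega
    · rcases hop with rfl | rfl
      · rw [if_pos rfl]
        have := (hP m hm).2
        rw [hopv] at this
        exact this (Or.inl rfl)
      · rw [if_neg (by decide)]
        positivity


-- A's candidate loop over the parsed program equals B's walk-based search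
theorem pvTryAllSearch (ps : List (String × Int)) (hP : pvProgOK ps)
    (ordF : PySem.Dict Int Int) (accF xF : Int)
    (hscan0 : pvScan ps (ps.length + 1) PySem.Dict.empty 0 0 = (ordF, accF, xF))
    (hgoodF : pvOrdGood ordF ps.length) :
    ∀ l : List (Int × (String × Int)),
      (∀ p ∈ l, ∃ m : Nat, m < ps.length ∧ p.1 = (m : Int) ∧ p.2 = ps.getD m ("", 0)) →
      pvTryAll ps l = pvSearch ps ordF accF (decide ((ps.length : Int) ≤ xF)) l := by
  intro l
  induction l with
  | nil => intro _; rfl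
  | cons p rest ih =>
    intro hl
    obtain ⟨m, hm, hp1, hp2⟩ := hl p (by simp)
    rcases p with ⟨i, opv⟩
    rcases opv with ⟨op, v⟩
    simp only at hp1 hp2
    subst hp1
    have hrest : ∀ q ∈ rest, ∃ m : Nat, m < ps.length ∧ q.1 = (m : Int) ∧ q.2 = ps.getD m ("", 0) :=
      fun q hq => hl q (List.mem_cons_of_mem _ hq)
    rw [pvTryAll, pvSearch]
    by_cases hop : op = "nop" ∨ op = "jmp"
    · rw [if_pos hop, if_neg (show ¬(op ≠ "nop" ∧ op ≠ "jmp") by rcases hop with rfl | rfl <;> simp)]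
      by_cases hvis : ordF.contains (m : Int) = true
      · rw [if_neg (show ¬ ordF.contains (m : Int) = false by simp [hvis])]
        have hiff := pvCandVisited ps hP ordF accF xF hscan0 hgoodF m hm op v hp2.symm hop hvis
        by_cases hok : (pvRunB ps (m : Int) (ps.length + 1) PySem.Set.empty 0 0).1 = "ok"
        · rw [if_pos hok, if_pos (hiff.mp hok)]
          have htn : ((m : Int)).toNat = m := by simp
          rw [htn, pvAcc_eq ps m (ps.length + 1) PySem.Set.empty 0 0]
          exact Prod.ext hok rfl
        · rw [if_neg hok, if_neg (fun hc => hok (hiff.mpr hc))]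
          exact ih hrest
      · have hvis' : ordF.contains (m : Int) = false := by
          cases hc : ordF.contains (m : Int)
          · rfl
          · exact absurd hc hvis
        rw [if_pos hvis']
        have hEQ0 : ∀ y : Int, (PySem.Dict.empty : PySem.Dict Int Int).contains y
            = PySem.Set.contains PySem.Set.empty y := by
          intro y; rw [PySem.Dict.contains_empty, pvSetEmptyContains]
        have hcnt0 : pvCnt (fun y => (PySem.Dict.empty : PySem.Dict Int Int).contains y) ps.length = 0 :=
          pvCnt_zero _ _ (fun y => PySem.Dict.contains_empty y)
        have hrun := pvC1 ps hP (m : Int) (ps.length + 1) PySem.Dict.empty PySem.Set.empty 0 0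
          (le_refl 0) hEQ0 (pvOrdGood_empty ps.length) (by rw [hcnt0]; omega)
          (by rw [hscan0]; exact hvis')
        rw [hscan0] at hrun
        simp only at hrun
        by_cases hokF : (ps.length : Int) ≤ xF
        · rw [if_pos hokF] at hrun
          rw [hrun]
          simp [hokF]
        · rw [if_neg hokF] at hrun
          rw [hrun]
          simp only [if_neg (show ¬ ("error", accF).1 = "ok" by simp),
            if_neg (show ¬ (decide ((ps.length : Int) ≤ xF)) = true by simp [hokF])]
          exact ih hrest
    · rw [if_neg hop, if_pos (show op ≠ "nop" ∧ op ≠ "jmp" from not_or.mp hop)]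
      exact ih hrest

-- ===== VERDICT (by name: the statement is the Claim_ definition above) =====
theorem fix_program_spec : Claim_equal_fix_program := by
  intro cs _ hpre
  unfold Spec_fix_program fix_program fix_program_alt
  by_cases hany : (cs.any fun c => PySem.Str.isIn "nop" c || PySem.Str.isIn "jmp" c) = true
  · rw [hany]
    simp only [Bool.not_true, Bool.false_eq_true, if_false]
    rcases hpre with h1 | h2
    · exfalso
      simp only [List.all_eq_true, Bool.and_eq_true, Bool.not_eq_eq_eq_not, Bool.not_true] at h1
      simp only [List.any_eq_true, Bool.or_eq_true] at hany
      obtain ⟨c, hc, hor⟩ := hany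
      obtain ⟨hn, hj⟩ := h1 c hc
      rcases hor with h | h
      · rw [hn] at h; exact absurd h (by simp)
      · rw [hj] at h; exact absurd h (by simp)
    · have h2' : ∀ k, k < cs.length → pvWfSafe k (cs.getD k "") = true := by
        intro k hk
        have := List.all_eq_true.mp h2 k (List.mem_range.mpr hk)
        simpa using this
      have hP := pvProgOK_of_wf cs h2'
      have hgoodF : pvOrdGood
          (pvScan (cs.map pvParse) ((cs.map pvParse).length + 1) PySem.Dict.empty 0 0).1
          (cs.map pvParse).length :=
        pvScan_good (cs.map pvParse) hP ((cs.map pvParse).length + 1) PySem.Dict.empty 0 0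
          (pvOrdGood_empty _) (le_refl 0)
      calc pvFixLoop cs (PySem.List.enumerate cs)
          = pvTryAll (cs.map pvParse) ((PySem.List.enumerate cs).map fun p => (p.1, pvParse p.2)) :=
            pvOuter cs h2' (PySem.List.enumerate cs) (by
              intro p hp
              obtain ⟨mm, hmm, ha, hb⟩ := pvEnumMem "" cs 0 p hp
              exact ⟨mm, hmm, by simpa using ha, hb⟩)
        _ = pvTryAll (cs.map pvParse) (PySem.List.enumerate (cs.map pvParse)) := by
            rw [pvEnumMap pvParse cs 0]
        _ = pvSearch (cs.map pvParse)
              (pvScan (cs.map pvParse) ((cs.map pvParse).length + 1) PySem.Dict.empty 0 0).1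
              (pvScan (cs.map pvParse) ((cs.map pvParse).length + 1) PySem.Dict.empty 0 0).2.1
              (decide (((cs.map pvParse).length : Int)
                ≤ (pvScan (cs.map pvParse) ((cs.map pvParse).length + 1) PySem.Dict.empty 0 0).2.2))
              (PySem.List.enumerate (cs.map pvParse)) :=
            pvTryAllSearch (cs.map pvParse) hP _ _ _ rfl hgoodF
              (PySem.List.enumerate (cs.map pvParse)) (by
              intro p hp
              obtain ⟨mm, hmm, ha, hb⟩ := pvEnumMem ("", 0) (cs.map pvParse) 0 p hp
              exact ⟨mm, hmm, by simpa using ha, hb⟩)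
  · have hanyf : (cs.any fun c => PySem.Str.isIn "nop" c || PySem.Str.isIn "jmp" c) = false := by
      simpa using hany
    rw [hanyf]
    simp only [Bool.not_false, if_true]
    refine pvFixLoop_err cs (PySem.List.enumerate cs) ?_
    intro p hp
    obtain ⟨mm, hmm, h1', h2'⟩ := pvEnumMem "" cs 0 p hp
    have hmem : p.2 ∈ cs := by
      rw [h2', List.getD_eq_getElem _ _ hmm]
      exact List.getElem_mem _
    have := List.any_eq_false.mp hanyf p.2 hmem
    constructor
    · cases h : PySem.Str.isIn "nop" p.2
      · rfl
      · exact absurd (by rw [h]; simp) this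
    · cases h : PySem.Str.isIn "jmp" p.2
      · rfl
      · exact absurd (by rw [h]; simp) this
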